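-- pv_equiv track=rewrite | github.com/kobejean/cp-library | cp_library/alg/dp/butterfly/butterfly_masks_fn.py | subset_conv
-- ===== SOURCE A (Python) =====
-- def butterfly_masks(N, Z):
--     for i in range(N):
--         m = b = 1<<i
--         while m < Z:
--             yield m^b, m
--             m = (m+1)|b
--
-- def ior_zeta_pair(A: list[int], B: list[int], N: int):
--     for m0, m1 in butterfly_masks(N, len(A)):
--         A[m1] += A[m0]
--         B[m1] += B[m0]
--     return A, B
--
-- def ior_mobius(A: list[int], N: int):
--     for m0, m1 in butterfly_masks(N, len(A)):
--         A[m1] -= A[m0]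
--     return A
--
-- def popcnts(N):
--     P = [0]*(1 << N)
--     for i in range(N):
--         for m in range(b := 1<<i):
--             P[m^b] = P[m] + 1
--     return P
--
-- def subset_conv(A,B,N):
--     assert len(A) == len(B)
--     Z = (N+1)*(M := 1<<N)
--     Ar,Br,Cr,P = [0]*Z, [0]*Z, [0]*Z, popcnts(N)
--     for i,p in enumerate(P): Ar[p<<N|i], Br[p<<N|i] = A[i], B[i]
--     ior_zeta_pair(Ar, Br, N)
--     for i in range(0,Z,M):
--         for j in range(0,Z-i,M):
--             ij = i+j
--             for k in range(M): Cr[ij|k] += Ar[i|k] * Br[j|k]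
--     ior_mobius(Cr, N)
--     for i,p in enumerate(P): A[i] = Cr[p<<N|i]
--     return A
-- ===== SOURCE B (Python) =====
-- def subset_conv(A, B, N):
--     # Direct subset-sum convolution: for each mask s sum A[t]*B[s^t] over all
--     # submasks t of s, into a fresh array C; then copy C into A (same in-place
--     # mutation of A as the original) and return A.  B is left unmodified.
--     assert len(A) == len(B)
--     M = 1 << N
--     C = [0] * M
--     for s in range(M):
--         acc = 0
--         for t in range(s + 1):
--             if t & s == t:
--                 acc += A[t] * B[s ^ t]
--         C[s] = acc
--     for s in range(M):
--         A[s] = C[s]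
--     return A
-- ===== Notes on version B (the rewrite author's own statement) =====
-- stated objective: simpler
-- what changed: Replaced the ranked zeta/butterfly/Moebius pipeline over an (N+1)*2^N scratch space by a direct subset-sum convolution: for each mask s, sum A[t]*B[s^t] over submasks t of s into a fresh array, then copy it into A.
import Mathlib
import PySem

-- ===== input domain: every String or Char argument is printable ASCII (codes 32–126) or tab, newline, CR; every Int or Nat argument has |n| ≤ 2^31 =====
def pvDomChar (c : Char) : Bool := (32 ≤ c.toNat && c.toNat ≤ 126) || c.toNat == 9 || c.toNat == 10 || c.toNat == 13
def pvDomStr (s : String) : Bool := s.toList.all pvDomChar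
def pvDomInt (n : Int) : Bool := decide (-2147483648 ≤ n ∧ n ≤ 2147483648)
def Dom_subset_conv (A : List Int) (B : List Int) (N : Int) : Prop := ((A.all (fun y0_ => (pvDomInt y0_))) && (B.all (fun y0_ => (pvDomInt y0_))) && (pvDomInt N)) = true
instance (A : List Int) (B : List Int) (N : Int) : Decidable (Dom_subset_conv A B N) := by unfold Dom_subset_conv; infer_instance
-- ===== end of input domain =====

-- B replaces A's ranked zeta/butterfly/Moebius pipeline by a direct subset-sum convolution
-- (simpler, not faster); like A, B overwrites the first 2^N entries of its argument A in
-- place (the equivalence proved here is about the returned value).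

-- ===== PORT A =====

/-- `l[i]` for an index known (under `Pre_`) to be in range. -/
def geti (l : List Int) (i : Nat) : Int := l.getD i 0

/-- `popcnts(N)` of A: nested loops filling `P[m^b] = P[m]+1`. -/
def pvPopcnts (n : Nat) : List Int :=
  (List.range n).foldl
    (fun P i => (List.range (1 <<< i)).foldl
      (fun P m => P.set (m ^^^ (1 <<< i)) (geti P m + 1)) P)
    (List.replicate (1 <<< n) 0)

/-- the `while m < Z: yield m^b, m; m = (m+1)|b` loop of `butterfly_masks`. -/
def pvMaskRun (b Z m : Nat) : List (Nat × Nat) :=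
  if m < Z then (m ^^^ b, m) :: pvMaskRun b Z ((m + 1) ||| b) else []
termination_by Z - m
decreasing_by
  have h1 : m + 1 ≤ (m + 1) ||| b := Nat.left_le_or
  omega

/-- `butterfly_masks(N, Z)` of A as a list of pairs. -/
def pvButterflyMasks (N Z : Nat) : List (Nat × Nat) :=
  (List.range N).flatMap (fun i => pvMaskRun (1 <<< i) Z (1 <<< i))

/-- `ior_zeta_pair` of A (Z = len(A) is read at entry; `set` keeps lengths fixed). -/
def pvZetaPair (AB : List Int × List Int) (n : Nat) : List Int × List Int :=
  (pvButterflyMasks n AB.1.length).foldl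
    (fun AB p => (AB.1.set p.2 (geti AB.1 p.2 + geti AB.1 p.1),
                  AB.2.set p.2 (geti AB.2 p.2 + geti AB.2 p.1))) AB

/-- `ior_mobius` of A. -/
def pvMobius (C : List Int) (n : Nat) : List Int :=
  (pvButterflyMasks n C.length).foldl
    (fun C p => C.set p.2 (geti C p.2 - geti C p.1)) C

/-- Python `range(0, stop, step)` for `step > 0` (exact: `⌈stop/step⌉` elements). -/
def pvStepRange (stop step : Nat) : List Nat :=
  (List.range ((stop + step - 1) / step)).map (· * step)

def subset_conv (A : List Int) (B : List Int) (N : Int) : List Int :=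
  let n := N.toNat
  let M := 1 <<< n
  let Z := (n + 1) * M
  let P := pvPopcnts n
  -- for i,p in enumerate(P): Ar[p<<N|i], Br[p<<N|i] = A[i], B[i]
  let ArBr := (PySem.List.enumerate P).foldl
    (fun (ab : List Int × List Int) pi =>
      (ab.1.set ((pi.2.toNat <<< n) ||| pi.1.toNat) (geti A pi.1.toNat),
       ab.2.set ((pi.2.toNat <<< n) ||| pi.1.toNat) (geti B pi.1.toNat)))
    (List.replicate Z 0, List.replicate Z 0)
  let ArBr := pvZetaPair ArBr n
  -- the triple accumulation loop into Cr
  let Cr := (pvStepRange Z M).foldl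
    (fun Cr i => (pvStepRange (Z - i) M).foldl
      (fun Cr j => (List.range M).foldl
        (fun Cr k => Cr.set ((i + j) ||| k)
          (geti Cr ((i + j) ||| k) + geti ArBr.1 (i ||| k) * geti ArBr.2 (j ||| k))) Cr) Cr)
    (List.replicate Z 0)
  let Cr := pvMobius Cr n
  -- for i,p in enumerate(P): A[i] = Cr[p<<N|i]
  (PySem.List.enumerate P).foldl
    (fun A pi => A.set pi.1.toNat (geti Cr ((pi.2.toNat <<< n) ||| pi.1.toNat))) A

-- ===== PORT B =====

def subset_conv_alt (A : List Int) (B : List Int) (N : Int) : List Int :=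
  let M := 1 <<< N.toNat
  let C := (List.range M).foldl
    (fun C s => C.set s
      ((List.range (s + 1)).foldl
        (fun acc t => if t &&& s == t then acc + geti A t * geti B (s ^^^ t) else acc) 0))
    (List.replicate M 0)
  (List.range M).foldl (fun R s => R.set s (geti C s)) A

-- ===== PRECONDITION & SPEC =====

-- Pre_ excludes exactly the inputs where A raises: N < 0 (ValueError from 1<<N),
-- len(A) != len(B) (AssertionError, which B re-checks and raises too) and
-- len(A) < 2^N (IndexError).
def Pre_subset_conv (A : List Int) (B : List Int) (N : Int) : Prop :=
  0 ≤ N ∧ A.length = B.length ∧ 2 ^ N.toNat ≤ A.length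
instance (A : List Int) (B : List Int) (N : Int) : Decidable (Pre_subset_conv A B N) := by
  unfold Pre_subset_conv; infer_instance

def pvWitness_subset_conv : List Int × List Int × Int := ([1, 2, 3, 4], [5, 6, 7, 8], 2)

def Spec_subset_conv (A : List Int) (B : List Int) (N : Int) (out : List Int) : Prop :=
  out = subset_conv_alt A B N
instance (A : List Int) (B : List Int) (N : Int) (out : List Int) :
    Decidable (Spec_subset_conv A B N out) := by unfold Spec_subset_conv; infer_instance

-- ===== CLAIM (what is proved, stated in full; the proofs are below) =====
def Claim_equal_subset_conv : Prop := ∀ (A : List Int) (B : List Int) (N : Int),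
  Dom_subset_conv A B N → Pre_subset_conv A B N → Spec_subset_conv A B N (subset_conv A B N)

-- ===== LEMMAS AND PROOFS =====

-- bit utilities
theorem pv_mod_two_of_testBit (x : Nat) : x % 2 = if x.testBit 0 then 1 else 0 := by
  rw [Nat.testBit_zero]
  rcases Nat.mod_two_eq_zero_or_one x with h | h <;> simp [h]

theorem pv_or_eq_add {u v : Nat} (h : u &&& v = 0) : u ||| v = u + v := by
  induction u using Nat.strong_induction_on generalizing v with
  | _ u ih =>
    rcases Nat.eq_zero_or_pos u with h0 | h0
    · simp [h0]
    have hd : u / 2 &&& v / 2 = 0 := by rw [← Nat.and_div_two, h]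
    have ihd := ih (u / 2) (by omega) hd
    have h1 : (u ||| v) / 2 = u / 2 + v / 2 := by rw [Nat.or_div_two, ihd]
    have hb : (u &&& v).testBit 0 = false := by rw [h]; exact Nat.zero_testBit 0
    rw [Nat.testBit_and] at hb
    have h2 : (u ||| v) % 2 = u % 2 + v % 2 := by
      rw [pv_mod_two_of_testBit, pv_mod_two_of_testBit, pv_mod_two_of_testBit, Nat.testBit_lor]
      cases hu : u.testBit 0 <;> cases hv : v.testBit 0 <;> simp [hu, hv] at hb ⊢
    omega

theorem pv_sub_or_xor {t s : Nat} (h : t ||| s = s) :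
    t ||| (s ^^^ t) = s ∧ t &&& (s ^^^ t) = 0 := by
  constructor <;> apply Nat.eq_of_testBit_eq <;> intro i <;>
    have hi := congrArg (fun x => x.testBit i) h <;>
    simp only [Nat.testBit_lor, Nat.testBit_xor, Nat.testBit_and, Nat.zero_testBit] at hi ⊢ <;>
    cases ht : t.testBit i <;> cases hs : s.testBit i <;> simp [ht, hs] at hi ⊢

theorem pv_disj_eq_xor {u v s : Nat} (h1 : u &&& v = 0) (h2 : u ||| v = s) : v = s ^^^ u := by
  apply Nat.eq_of_testBit_eq; intro i
  have ha := congrArg (fun x => x.testBit i) h1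
  have ho := congrArg (fun x => x.testBit i) h2
  simp only [Nat.testBit_and, Nat.testBit_lor, Nat.testBit_xor, Nat.zero_testBit] at ha ho ⊢
  cases hu : u.testBit i <;> cases hv : v.testBit i <;> simp [hu, hv] at ha ho ⊢ <;> omega

theorem pv_and_eq_iff_or_eq {t s : Nat} : t &&& s = t ↔ t ||| s = s := by
  constructor <;> intro h <;> apply Nat.eq_of_testBit_eq <;> intro i <;>
    have hi := congrArg (fun x => x.testBit i) h <;>
    simp only [Nat.testBit_and, Nat.testBit_lor] at hi ⊢ <;>
    cases ht : t.testBit i <;> cases hs : s.testBit i <;> simp [ht, hs] at hi ⊢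

-- pc : popcount via a Finset of bit positions
def pc (m : Nat) : Nat := ((Finset.range (m + 1)).filter (fun i => m.testBit i)).card

theorem pc_eq_range {K m : Nat} (h : m < 2 ^ K) :
    pc m = ((Finset.range K).filter (fun i => m.testBit i)).card := by
  have key : ∀ K1 K2 : Nat, m < 2 ^ K1 → m < 2 ^ K2 →
      ((Finset.range K1).filter (fun i => m.testBit i)) =
      ((Finset.range K2).filter (fun i => m.testBit i)) := by
    intro K1 K2 h1 h2
    ext i
    simp only [Finset.mem_filter, Finset.mem_range]
    constructor
    · rintro ⟨-, hb⟩
      refine ⟨?_, hb⟩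
      have := Nat.ge_two_pow_of_testBit hb
      have : (2:Nat) ^ i < 2 ^ K2 := by omega
      exact (Nat.pow_lt_pow_iff_right one_lt_two).mp this
    · rintro ⟨-, hb⟩
      refine ⟨?_, hb⟩
      have := Nat.ge_two_pow_of_testBit hb
      have : (2:Nat) ^ i < 2 ^ K1 := by omega
      exact (Nat.pow_lt_pow_iff_right one_lt_two).mp this
  exact congrArg Finset.card
    (key (m + 1) K (lt_of_lt_of_le Nat.lt_two_pow_self (Nat.pow_le_pow_right (by norm_num) (by omega))) h)

theorem pc_le {K m : Nat} (h : m < 2 ^ K) : pc m ≤ K := by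
  rw [pc_eq_range h]
  exact le_trans (Finset.card_filter_le _ _) (by simp)

theorem pc_or_and (u v : Nat) : pc (u ||| v) + pc (u &&& v) = pc u + pc v := by
  set K := u + v + 1 with hK
  have hbig : u + v < 2 ^ K := by
    have h1 : u + v < 2 ^ (u + v) := Nat.lt_two_pow_self
    have h2 : (2:Nat) ^ (u + v) ≤ 2 ^ K := Nat.pow_le_pow_right (by norm_num) (by omega)
    omega
  have hu : u < 2 ^ K := by omega
  have hv : v < 2 ^ K := by omega
  have hor : u ||| v < 2 ^ K := Nat.or_lt_two_pow hu hv
  have hand : u &&& v < 2 ^ K := lt_of_le_of_lt Nat.and_le_left hu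
  rw [pc_eq_range hu, pc_eq_range hv, pc_eq_range hor, pc_eq_range hand]
  have hunion : (Finset.range K).filter (fun i => (u ||| v).testBit i) =
      ((Finset.range K).filter (fun i => u.testBit i)) ∪
      ((Finset.range K).filter (fun i => v.testBit i)) := by
    ext i
    simp only [Finset.mem_union, Finset.mem_filter, Finset.mem_range, Nat.testBit_lor]
    cases hbu : u.testBit i <;> cases hbv : v.testBit i <;> simp [hbu, hbv]
  have hinter : (Finset.range K).filter (fun i => (u &&& v).testBit i) =
      ((Finset.range K).filter (fun i => u.testBit i)) ∩
      ((Finset.range K).filter (fun i => v.testBit i)) := by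
    ext i
    simp only [Finset.mem_inter, Finset.mem_filter, Finset.mem_range, Nat.testBit_and]
    cases hbu : u.testBit i <;> cases hbv : v.testBit i <;> simp [hbu, hbv]
  rw [hunion, hinter]
  exact Finset.card_union_add_card_inter _ _

theorem pc_zero : pc 0 = 0 := by decide

theorem pc_two_pow (i : Nat) : pc (2 ^ i) = 1 := by
  have h : (2:Nat) ^ i < 2 ^ (i + 1) := by
    have := Nat.pow_lt_pow_right (a := 2) one_lt_two (Nat.lt_succ_self i); omega
  rw [pc_eq_range h]
  have : ((Finset.range (i + 1)).filter (fun j => (2 ^ i).testBit j)) = {i} := by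
    ext j
    simp only [Finset.mem_filter, Finset.mem_range, Nat.testBit_two_pow, Finset.mem_singleton,
      decide_eq_true_eq]
    omega
  rw [this, Finset.card_singleton]

theorem pc_sub_add {t s : Nat} (h : t ||| s = s) : pc t + pc (s ^^^ t) = pc s := by
  obtain ⟨hor, hand⟩ := pv_sub_or_xor h
  have := pc_or_and t (s ^^^ t)
  rw [hor, hand, pc_zero] at this
  omega

theorem pv_and_two_pow_eq_zero {m i : Nat} (h : m.testBit i = false) : m &&& 2 ^ i = 0 := by
  apply Nat.eq_of_testBit_eq; intro j
  simp only [Nat.testBit_and, Nat.testBit_two_pow, Nat.zero_testBit]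
  by_cases hij : i = j
  · subst hij; simp [h]
  · simp [hij]

theorem pv_xor_two_pow_eq_or {m i : Nat} (h : m.testBit i = false) : m ^^^ 2 ^ i = m ||| 2 ^ i := by
  apply Nat.eq_of_testBit_eq; intro j
  simp only [Nat.testBit_xor, Nat.testBit_lor, Nat.testBit_two_pow]
  by_cases hij : i = j
  · subst hij; simp [h]
  · simp [hij]

theorem pc_xor_two_pow {m i : Nat} (h : m.testBit i = false) : pc (m ^^^ 2 ^ i) = pc m + 1 := by
  have hand := pv_and_two_pow_eq_zero h
  have := pc_or_and m (2 ^ i)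
  rw [hand, pc_zero, pc_two_pow] at this
  rw [pv_xor_two_pow_eq_or h]
  omega

theorem pv_or_two_pow_of_testBit {x i : Nat} (h : x.testBit i = true) : x ||| 2 ^ i = x := by
  apply Nat.eq_of_testBit_eq; intro j
  simp only [Nat.testBit_lor, Nat.testBit_two_pow]
  by_cases hij : i = j
  · subst hij; simp [h]
  · simp [hij]

theorem pv_xor_two_pow_lt {x i : Nat} (h : x.testBit i = true) : x ^^^ 2 ^ i < x := by
  have hb : (x ^^^ 2 ^ i).testBit i = false := by
    simp [Nat.testBit_xor, h, Nat.testBit_two_pow]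
  have hand := pv_and_two_pow_eq_zero hb
  have hor : (x ^^^ 2 ^ i) ||| 2 ^ i = x := by
    rw [← pv_xor_two_pow_eq_or hb, Nat.xor_assoc, Nat.xor_self, Nat.xor_zero]
  have := pv_or_eq_add hand
  rw [hor] at this
  have hpos : 0 < 2 ^ i := Nat.two_pow_pos i
  omega

theorem tb (x i : Nat) : x.testBit i = decide (x / 2 ^ i % 2 = 1) := Nat.testBit_eq_decide_div_mod_eq

-- no index with bit i set lies strictly between m and (m+1) ||| 2^i
theorem pv_next_le {i m s : Nat} (hm : m.testBit i = true) (hs : s.testBit i = true)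
    (hlt : m < s) : (m + 1) ||| 2 ^ i ≤ s := by
  by_cases hb : (m + 1).testBit i
  · rw [pv_or_two_pow_of_testBit hb]
    omega
  · have hadd : (m + 1) ||| 2 ^ i = m + 1 + 2 ^ i :=
      pv_or_eq_add (pv_and_two_pow_eq_zero (by simpa using hb))
    rw [hadd]
    by_contra hcon
    push_neg at hcon
    obtain ⟨e, he⟩ : ∃ e, 2 ^ i = e := ⟨_, rfl⟩
    have e0 : 0 < e := he ▸ Nat.two_pow_pos i
    rw [tb] at hm hs hb
    rw [he] at hm hs hb hcon
    simp only [decide_eq_true_eq] at hm hs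
    have hbb : (m + 1) / e % 2 ≠ 1 := fun hx => hb (by simp [hx])
    have hdm := Nat.div_add_mod m e
    have hme : m % e < e := Nat.mod_lt _ e0
    have h1 : (m + 1) / e = m / e + (m % e + 1) / e := by
      have hh : m + 1 = e * (m / e) + (m % e + 1) := by omega
      rw [hh, Nat.mul_add_div e0]
    by_cases hr : m % e + 1 < e
    · have h0 : (m % e + 1) / e = 0 := Nat.div_eq_of_lt hr
      omega
    · have hre : m % e + 1 = e := by omega
      have h2 : (m + 1) / e = m / e + 1 := by
        rw [h1, hre, Nat.div_self e0]
      have hse : s / e = m / e + 1 := by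
        apply Nat.div_eq_of_lt_le
        · have hh : (m / e + 1) * e = e * (m / e) + e := by ring
          omega
        · have hh : (m / e + 1 + 1) * e = e * (m / e) + e + e := by ring
          omega
      omega


theorem geti_set_self {l : List Int} {i : Nat} (h : i < l.length) (v : Int) :
    geti (l.set i v) i = v := by
  simp [geti, List.getD_eq_getElem?_getD, List.getElem?_set_self h]

theorem geti_set_ne {l : List Int} {i j : Nat} (h : i ≠ j) (v : Int) :
    geti (l.set i v) j = geti l j := by
  simp [geti, List.getD_eq_getElem?_getD, List.getElem?_set_ne h]

theorem pv_maskRun_mem {i Z : Nat} :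
    ∀ m, m.testBit i = true → ∀ u ∈ pvMaskRun (2 ^ i) Z m,
      u.1 = u.2 ^^^ 2 ^ i ∧ u.2.testBit i = true ∧ u.2 < Z ∧ m ≤ u.2 := by
  have H : ∀ d m, Z - m ≤ d → m.testBit i = true → ∀ u ∈ pvMaskRun (2 ^ i) Z m,
      u.1 = u.2 ^^^ 2 ^ i ∧ u.2.testBit i = true ∧ u.2 < Z ∧ m ≤ u.2 := by
    intro d
    induction d with
    | zero =>
      intro m hle hm u hu
      rw [pvMaskRun] at hu
      split at hu
      · omega
      · simp at hu
    | succ d ih =>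
      intro m hle hm u hu
      rw [pvMaskRun] at hu
      split at hu
      case isTrue hmZ =>
        rcases List.mem_cons.mp hu with rfl | hu'
        · exact ⟨rfl, hm, hmZ, le_refl m⟩
        · have hm1 : m + 1 ≤ (m + 1) ||| 2 ^ i := Nat.left_le_or
          have hbit : ((m + 1) ||| 2 ^ i).testBit i = true := by
            simp [Nat.testBit_lor, Nat.testBit_two_pow]
          obtain ⟨h1, h2, h3, h4⟩ := ih ((m + 1) ||| 2 ^ i) (by omega) hbit u hu'
          exact ⟨h1, h2, h3, by omega⟩
      · simp at hu
  intro m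
  exact H (Z - m) m (le_refl _)

theorem pv_maskRun_filter {i Z s : Nat} :
    ∀ m, m.testBit i = true →
      (pvMaskRun (2 ^ i) Z m).filter (fun u => u.2 = s) =
      if m ≤ s ∧ s < Z ∧ s.testBit i then [(s ^^^ 2 ^ i, s)] else [] := by
  have H : ∀ d m, Z - m ≤ d → m.testBit i = true →
      (pvMaskRun (2 ^ i) Z m).filter (fun u => u.2 = s) =
      if m ≤ s ∧ s < Z ∧ s.testBit i then [(s ^^^ 2 ^ i, s)] else [] := by
    intro d
    induction d with
    | zero =>
      intro m hle hm
      rw [pvMaskRun]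
      split
      case isTrue h => omega
      case isFalse h =>
        rw [List.filter_nil, if_neg]
        rintro ⟨ha, hb, -⟩; omega
    | succ d ih =>
      intro m hle hm
      rw [pvMaskRun]
      split
      case isTrue hmZ =>
        have hm1 : m + 1 ≤ (m + 1) ||| 2 ^ i := Nat.left_le_or
        have hbit : ((m + 1) ||| 2 ^ i).testBit i = true := by
          simp [Nat.testBit_lor, Nat.testBit_two_pow]
        rw [List.filter_cons, ih ((m + 1) ||| 2 ^ i) (by omega) hbit]
        by_cases hms : m = s
        · subst hms
          have hnot : ¬ ((m + 1) ||| 2 ^ i ≤ m ∧ m < Z ∧ m.testBit i = true) := by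
            rintro ⟨h1, -, -⟩; omega
          have hyes : m ≤ m ∧ m < Z ∧ m.testBit i = true := ⟨le_refl m, hmZ, hm⟩
          rw [if_neg hnot, if_pos hyes]
          simp
        · have hd : (decide ((m ^^^ 2 ^ i, m).2 = s)) = false := by simp [hms]
          simp only [hd, Bool.false_eq_true, if_false]
          by_cases hcond : m ≤ s ∧ s < Z ∧ s.testBit i = true
          · have hnext : (m + 1) ||| 2 ^ i ≤ s := pv_next_le hm hcond.2.2 (by omega)
            have hyes : (m + 1) ||| 2 ^ i ≤ s ∧ s < Z ∧ s.testBit i = true := ⟨hnext, hcond.2⟩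
            rw [if_pos hyes, if_pos hcond]
          · have hnot2 : ¬ ((m + 1) ||| 2 ^ i ≤ s ∧ s < Z ∧ s.testBit i = true) := by
              rintro ⟨ha, hb, hc⟩; exact hcond ⟨by omega, hb, hc⟩
            rw [if_neg hnot2, if_neg hcond]
      case isFalse h =>
        rw [List.filter_nil, if_neg]
        rintro ⟨ha, hb, -⟩; omega
  intro m
  exact H (Z - m) m (le_refl _)

-- generic read/write fold: writes at u.2, reads at u.1, reads never written
theorem pv_rwFold (op : Int → Int → Int) :
    ∀ (l : List (Nat × Nat)) (C X : List Int), C.length = X.length →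
    (∀ u ∈ l, u.2 < X.length) →
    (∀ u ∈ l, geti C u.1 = geti X u.1) →
    (∀ u ∈ l, ∀ v ∈ l, u.1 ≠ v.2) →
    (l.foldl (fun (D : List Int) p => D.set p.2 (op (geti D p.2) (geti D p.1))) C).length = X.length ∧
    ∀ s : Nat, geti (l.foldl (fun (D : List Int) p => D.set p.2 (op (geti D p.2) (geti D p.1))) C) s =
      (l.filter (fun u => u.2 = s)).foldl (fun acc u => op acc (geti X u.1)) (geti C s) := by
  intro l
  induction l with
  | nil => intro C X hlen _ _ _; exact ⟨hlen, fun s => by simp⟩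
  | cons u0 rest ih =>
    intro C X hlen hw hr hnr
    have hu0 : u0 ∈ u0 :: rest := List.mem_cons_self
    have hC'len : (C.set u0.2 (op (geti C u0.2) (geti C u0.1))).length = X.length := by
      simp [hlen]
    have hr' : ∀ u ∈ rest, geti (C.set u0.2 (op (geti C u0.2) (geti C u0.1))) u.1 = geti X u.1 := by
      intro u hu
      rw [geti_set_ne (Ne.symm (hnr u (List.mem_cons_of_mem _ hu) u0 hu0)) _]
      exact hr u (List.mem_cons_of_mem _ hu)
    obtain ⟨ihlen, ihval⟩ := ih (C.set u0.2 (op (geti C u0.2) (geti C u0.1))) X hC'len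
      (fun u hu => hw u (List.mem_cons_of_mem _ hu)) hr'
      (fun u hu v hv => hnr u (List.mem_cons_of_mem _ hu) v (List.mem_cons_of_mem _ hv))
    refine ⟨ihlen, fun s => ?_⟩
    rw [List.foldl_cons, ihval s, List.filter_cons]
    by_cases hus : u0.2 = s
    · subst hus
      have hwlt : u0.2 < C.length := by rw [hlen]; exact hw u0 hu0
      rw [if_pos (by simp : (decide (u0.2 = u0.2)) = true), List.foldl_cons,
        geti_set_self hwlt, hr u0 hu0]
    · rw [if_neg (by simp [hus]), geti_set_ne hus]

-- generic overwrite fold: writes fixed values at injective indices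
theorem pv_setFold {ι : Type} (idx : ι → Nat) (w : ι → Int) :
    ∀ (l : List ι) (C : List Int), (∀ u ∈ l, idx u < C.length) →
    (∀ u ∈ l, ∀ v ∈ l, idx u = idx v → u = v) →
    (l.foldl (fun (D : List Int) u => D.set (idx u) (w u)) C).length = C.length ∧
    (∀ s : Nat, (∀ u ∈ l, idx u ≠ s) →
      geti (l.foldl (fun (D : List Int) u => D.set (idx u) (w u)) C) s = geti C s) ∧
    (∀ u ∈ l, geti (l.foldl (fun (D : List Int) u => D.set (idx u) (w u)) C) (idx u) = w u) := by
  intro l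
  induction l with
  | nil => intro C _ _; exact ⟨rfl, fun s _ => rfl, fun u hu => absurd hu (List.not_mem_nil)⟩
  | cons u0 rest ih =>
    intro C hlt hinj
    have hu0 : u0 ∈ u0 :: rest := List.mem_cons_self
    obtain ⟨ihlen, ihunt, ihval⟩ := ih (C.set (idx u0) (w u0))
      (fun u hu => by rw [List.length_set]; exact hlt u (List.mem_cons_of_mem _ hu))
      (fun u hu v hv h => hinj u (List.mem_cons_of_mem _ hu) v (List.mem_cons_of_mem _ hv) h)
    refine ⟨by rw [List.foldl_cons, ihlen, List.length_set], fun s hs => ?_, fun u hu => ?_⟩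
    · rw [List.foldl_cons, ihunt s (fun u hu => hs u (List.mem_cons_of_mem _ hu)),
        geti_set_ne (hs u0 hu0)]
    · rcases List.mem_cons.mp hu with heq | hu'
      · by_cases hmem : u0 ∈ rest
        · rw [heq]; exact ihval u0 hmem
        · rw [heq, List.foldl_cons, ihunt (idx u0) ?_, geti_set_self (hlt u0 hu0)]
          intro v hv hvi
          exact hmem ((hinj v (List.mem_cons_of_mem _ hv) u0 hu0 hvi) ▸ hv)
      · exact ihval u hu'

-- generic accumulate fold: adds fixed values at (possibly repeated) indices
theorem pv_addFold {ι : Type} (idx : ι → Nat) (v : ι → Int) :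
    ∀ (l : List ι) (C : List Int), (∀ u ∈ l, idx u < C.length) →
    (l.foldl (fun (D : List Int) u => D.set (idx u) (geti D (idx u) + v u)) C).length = C.length ∧
    ∀ s : Nat, geti (l.foldl (fun (D : List Int) u => D.set (idx u) (geti D (idx u) + v u)) C) s =
      geti C s + ((l.filter (fun u => idx u = s)).map v).sum := by
  intro l
  induction l with
  | nil => intro C _; exact ⟨rfl, fun s => by simp⟩
  | cons u0 rest ih =>
    intro C hlt
    have hu0 : u0 ∈ u0 :: rest := List.mem_cons_self
    obtain ⟨ihlen, ihval⟩ := ih (C.set (idx u0) (geti C (idx u0) + v u0))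
      (fun u hu => by rw [List.length_set]; exact hlt u (List.mem_cons_of_mem _ hu))
    refine ⟨by rw [List.foldl_cons, ihlen, List.length_set], fun s => ?_⟩
    rw [List.foldl_cons, ihval s, List.filter_cons]
    by_cases hus : idx u0 = s
    · subst hus
      rw [if_pos (by simp : (decide (idx u0 = idx u0)) = true),
        geti_set_self (hlt u0 hu0), List.map_cons, List.sum_cons]
      ring
    · rw [if_neg (by simp [hus]), geti_set_ne hus]

-- composing length-preserving "pointwise add" steps
theorem pv_sumFold {ι : Type} (g : ι → Nat → Int) (step : List Int → ι → List Int) :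
    ∀ (l : List ι) (C : List Int),
    (∀ (D : List Int) u, u ∈ l → D.length = C.length →
      (step D u).length = D.length ∧ ∀ s : Nat, geti (step D u) s = geti D s + g u s) →
    (l.foldl step C).length = C.length ∧
    ∀ s : Nat, geti (l.foldl step C) s = geti C s + (l.map (fun u => g u s)).sum := by
  intro l
  induction l with
  | nil => intro C _; exact ⟨rfl, fun s => by simp⟩
  | cons u0 rest ih =>
    intro C hstep
    obtain ⟨hlen0, hval0⟩ := hstep C u0 List.mem_cons_self rfl
    obtain ⟨ihlen, ihval⟩ := ih (step C u0)
      (fun D u hu hD => by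
        obtain ⟨h1, h2⟩ := hstep D u (List.mem_cons_of_mem _ hu) (by rw [hD, hlen0])
        exact ⟨h1, h2⟩)
    refine ⟨by rw [List.foldl_cons, ihlen, hlen0], fun s => ?_⟩
    rw [List.foldl_cons, ihval s, hval0 s, List.map_cons, List.sum_cons]
    ring

-- guarded accumulation = sum over the filtered list
theorem pv_condFoldSum (p : Nat → Bool) (g : Nat → Int) :
    ∀ (l : List Nat) (base : Int),
    l.foldl (fun acc t => if p t then acc + g t else acc) base =
      base + ((l.filter p).map g).sum := by
  intro l
  induction l with
  | nil => intro base; simp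
  | cons t0 rest ih =>
    intro base
    rw [List.foldl_cons, List.filter_cons]
    by_cases hp : p t0
    · rw [if_pos hp, if_pos (by simp [hp]), ih, List.map_cons, List.sum_cons]; ring
    · rw [if_neg hp, if_neg (by simp [hp]), ih]


-- ===== mathematical layer: abstract butterfly passes over Nat-indexed functions =====

def mpass (c : Int) (i : Nat) (f : Nat → Int) : Nat → Int :=
  fun s => if s.testBit i then f s + c * f (s ^^^ 2 ^ i) else f s

def mtrans (c : Int) (n : Nat) (f : Nat → Int) : Nat → Int :=
  (List.range n).foldl (fun g j => mpass c j g) f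

theorem mtrans_succ (c : Int) (n : Nat) (f : Nat → Int) :
    mtrans c (n + 1) f = mpass c n (mtrans c n f) := by
  unfold mtrans
  rw [List.range_succ, List.foldl_append, List.foldl_cons, List.foldl_nil]

theorem mpass_comm {i j : Nat} (hij : i ≠ j) (c c' : Int) (f : Nat → Int) :
    mpass c i (mpass c' j f) = mpass c' j (mpass c i f) := by
  funext s
  have hbi : ∀ x : Nat, (x ^^^ 2 ^ j).testBit i = x.testBit i := by
    intro x
    simp [Nat.testBit_xor, Nat.testBit_two_pow, Ne.symm hij]
  have hbj : ∀ x : Nat, (x ^^^ 2 ^ i).testBit j = x.testBit j := by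
    intro x
    simp [Nat.testBit_xor, Nat.testBit_two_pow, hij]
  have hxx : s ^^^ 2 ^ i ^^^ 2 ^ j = s ^^^ 2 ^ j ^^^ 2 ^ i := by
    rw [Nat.xor_assoc, Nat.xor_assoc, Nat.xor_comm (2 ^ i)]
  simp only [mpass, hbi, hbj]
  by_cases h1 : s.testBit i <;> by_cases h2 : s.testBit j <;>
    simp only [h1, h2, if_true, Bool.false_eq_true, if_false, hxx] <;> ring

theorem mpass_inv' (i : Nat) (f : Nat → Int) :
    mpass (-1) i (mpass 1 i f) = f := by
  funext s
  simp only [mpass]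
  by_cases h : s.testBit i
  · have hb : (s ^^^ 2 ^ i).testBit i = false := by
      simp [Nat.testBit_xor, h]
    simp only [h, if_true, hb, Bool.false_eq_true, if_false, Nat.xor_cancel_right]
    ring
  · simp [h]

theorem mtrans_comm_mpass (c c' : Int) :
    ∀ (n j : Nat), n ≤ j → ∀ f : Nat → Int,
      mtrans c n (mpass c' j f) = mpass c' j (mtrans c n f) := by
  intro n
  induction n with
  | zero => intro j _ f; rfl
  | succ n ih =>
    intro j hj f
    rw [mtrans_succ, mtrans_succ, ih j (by omega) f, mpass_comm (by omega : n ≠ j)]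

theorem mtrans_inv' (n : Nat) (f : Nat → Int) :
    mtrans (-1) n (mtrans 1 n f) = f := by
  induction n generalizing f with
  | zero => rfl
  | succ n ih =>
    rw [mtrans_succ, mtrans_succ, mtrans_comm_mpass _ _ n n (le_refl n), ih, mpass_inv']

theorem mtrans_congr (c : Int) (n : Nat) :
    ∀ (s : Nat) (f g : Nat → Int), (∀ t ≤ s, f t = g t) →
      ∀ t ≤ s, mtrans c n f t = mtrans c n g t := by
  induction n with
  | zero => intro s f g h t ht; exact h t ht
  | succ n ih =>
    intro s f g h t ht
    rw [mtrans_succ, mtrans_succ]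
    simp only [mpass]
    by_cases hb : t.testBit n
    · have hlt : t ^^^ 2 ^ n < t := pv_xor_two_pow_lt hb
      rw [if_pos hb, if_pos hb, ih s f g h t ht, ih s f g h (t ^^^ 2 ^ n) (by omega)]
    · rw [if_neg hb, if_neg hb, ih s f g h t ht]

-- the set of submasks of s that differ from s only in bits < i
def Dset (i s : Nat) : Finset Nat :=
  (Finset.range (s + 1)).filter (fun t => t ||| s = s ∧ s ^^^ t < 2 ^ i)

theorem mem_Dset {i s t : Nat} : t ∈ Dset i s ↔ t ≤ s ∧ t ||| s = s ∧ s ^^^ t < 2 ^ i := by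
  simp [Dset, Finset.mem_filter, Finset.mem_range, Nat.lt_succ_iff]

theorem Dset_zero (s : Nat) : Dset 0 s = {s} := by
  ext t
  rw [mem_Dset, Finset.mem_singleton]
  constructor
  · rintro ⟨h1, h2, h3⟩
    have : s ^^^ t = 0 := by omega
    have := congrArg (fun x => x ^^^ t) this
    simpa [Nat.xor_assoc] using this.symm
  · rintro rfl
    exact ⟨le_refl t, Nat.or_self t, by simp [Nat.two_pow_pos]⟩


theorem pv_or_eq_iff_forall {t s : Nat} :
    t ||| s = s ↔ ∀ i, t.testBit i = true → s.testBit i = true := by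
  constructor
  · intro h i hb
    have hh := congrArg (fun x => x.testBit i) h
    simpa [Nat.testBit_lor, hb] using hh
  · intro h
    apply Nat.eq_of_testBit_eq
    intro i
    rw [Nat.testBit_lor]
    cases hb : t.testBit i
    · simp
    · simp [h i hb]

theorem pv_le_of_or_eq {t s : Nat} (h : t ||| s = s) : t ≤ s := h ▸ Nat.left_le_or

theorem pv_lt_two_pow_of_testBit_false {x n : Nat} (h1 : x < 2 ^ (n + 1))
    (h2 : x.testBit n = false) : x < 2 ^ n := by
  have e0 : 0 < 2 ^ n := Nat.two_pow_pos n
  have hd : x / 2 ^ n < 2 := Nat.div_lt_of_lt_mul (by rw [← pow_succ]; exact h1)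
  have hne : x / 2 ^ n % 2 ≠ 1 := by intro hx; rw [tb, hx] at h2; simp at h2
  obtain ⟨q, hq⟩ : ∃ q, x / 2 ^ n = q := ⟨_, rfl⟩
  rw [hq] at hd hne
  have h0 : q = 0 := by omega
  exact (Nat.div_eq_zero_iff_lt e0).mp (hq.trans h0)

theorem pv_xor_two_pow_sub {x n : Nat} (h : x.testBit n = true) : x ^^^ 2 ^ n = x - 2 ^ n := by
  have hb : (x ^^^ 2 ^ n).testBit n = false := by simp [Nat.testBit_xor, h]
  have hor : (x ^^^ 2 ^ n) ||| 2 ^ n = x := by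
    rw [← pv_xor_two_pow_eq_or hb, Nat.xor_assoc, Nat.xor_self, Nat.xor_zero]
  have := pv_or_eq_add (pv_and_two_pow_eq_zero hb)
  omega

theorem pv_xor_two_pow_add {x n : Nat} (h : x.testBit n = false) : x ^^^ 2 ^ n = x + 2 ^ n := by
  rw [pv_xor_two_pow_eq_or h]
  exact pv_or_eq_add (pv_and_two_pow_eq_zero h)

theorem pv_testBit_of_xor_two_pow {s n i : Nat} (hi : i ≠ n) :
    (s ^^^ 2 ^ n).testBit i = s.testBit i := by
  simp [Nat.testBit_xor, Nat.testBit_two_pow, Ne.symm hi]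

theorem Dset_succ_of_not {n s : Nat} (hs : s.testBit n = false) : Dset (n + 1) s = Dset n s := by
  ext t
  rw [mem_Dset, mem_Dset]
  constructor
  · rintro ⟨h1, h2, h3⟩
    refine ⟨h1, h2, pv_lt_two_pow_of_testBit_false h3 ?_⟩
    have ht : t.testBit n = false := by
      cases hb : t.testBit n
      · rfl
      · rw [pv_or_eq_iff_forall.mp h2 n hb] at hs; exact hs
    simp [Nat.testBit_xor, hs, ht]
  · rintro ⟨h1, h2, h3⟩
    have : (2:Nat) ^ n < 2 ^ (n + 1) := by
      have := Nat.two_pow_pos n; rw [pow_succ]; omega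
    exact ⟨h1, h2, by omega⟩

theorem Dset_succ_of_bit {n s : Nat} (hs : s.testBit n = true) :
    Dset (n + 1) s = Dset n s ∪ Dset n (s ^^^ 2 ^ n) := by
  have hs' : (s ^^^ 2 ^ n).testBit n = false := by simp [Nat.testBit_xor, hs]
  have hsub : s ^^^ 2 ^ n = s - 2 ^ n := pv_xor_two_pow_sub hs
  have hge : 2 ^ n ≤ s := Nat.ge_two_pow_of_testBit hs
  ext t
  rw [Finset.mem_union, mem_Dset, mem_Dset, mem_Dset]
  constructor
  · rintro ⟨h1, h2, h3⟩
    cases hb : t.testBit n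
    · right
      have hor : t ||| (s ^^^ 2 ^ n) = s ^^^ 2 ^ n := by
        rw [pv_or_eq_iff_forall]
        intro i hbi
        by_cases hin : i = n
        · rw [hin] at hbi; rw [hbi] at hb; exact absurd hb (by simp)
        · rw [pv_testBit_of_xor_two_pow hin]
          exact pv_or_eq_iff_forall.mp h2 i hbi
      have hxb : (s ^^^ t).testBit n = true := by simp [Nat.testBit_xor, hs, hb]
      have hxor : (s ^^^ 2 ^ n) ^^^ t = (s ^^^ t) - 2 ^ n := by
        rw [Nat.xor_comm s (2 ^ n), Nat.xor_assoc, ← pv_xor_two_pow_sub hxb, Nat.xor_comm]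
      have hpow : (2:Nat) ^ (n + 1) = 2 ^ n + 2 ^ n := by rw [pow_succ]; omega
      have hge2 : 2 ^ n ≤ s ^^^ t := Nat.ge_two_pow_of_testBit hxb
      exact ⟨pv_le_of_or_eq hor, hor, by omega⟩
    · left
      have hxb : (s ^^^ t).testBit n = false := by simp [Nat.testBit_xor, hs, hb]
      exact ⟨h1, h2, pv_lt_two_pow_of_testBit_false h3 hxb⟩
  · rintro (⟨h1, h2, h3⟩ | ⟨h1, h2, h3⟩)
    · have : (2:Nat) ^ n < 2 ^ (n + 1) := by
        have := Nat.two_pow_pos n; rw [pow_succ]; omega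
      exact ⟨h1, h2, by omega⟩
    · have hor : t ||| s = s := by
        rw [pv_or_eq_iff_forall]
        intro i hbi
        have hsi := pv_or_eq_iff_forall.mp h2 i hbi
        by_cases hin : i = n
        · rw [hin] at hsi; rw [hs'] at hsi; exact absurd hsi (by simp)
        · rw [pv_testBit_of_xor_two_pow hin] at hsi; exact hsi
      have htb : t.testBit n = false := by
        cases hb : t.testBit n
        · rfl
        · have := pv_or_eq_iff_forall.mp h2 n hb
          rw [hs'] at this; exact absurd this (by simp)
      have hxbit : (s ^^^ t).testBit n = true := by simp [Nat.testBit_xor, hs, htb]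
      have hswap : (s ^^^ 2 ^ n) ^^^ t = (s ^^^ t) ^^^ 2 ^ n := by
        rw [Nat.xor_assoc, Nat.xor_comm (2 ^ n) t, ← Nat.xor_assoc]
      have hge2 : 2 ^ n ≤ s ^^^ t := Nat.ge_two_pow_of_testBit hxbit
      have hxeq : (s ^^^ 2 ^ n) ^^^ t = (s ^^^ t) - 2 ^ n := by
        rw [hswap, pv_xor_two_pow_sub hxbit]
      have hpow : (2:Nat) ^ (n + 1) = 2 ^ n + 2 ^ n := by rw [pow_succ]; omega
      exact ⟨by omega, hor, by omega⟩

theorem Dset_disjoint_of_bit {n s : Nat} (hs : s.testBit n = true) :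
    Disjoint (Dset n s) (Dset n (s ^^^ 2 ^ n)) := by
  have hs' : (s ^^^ 2 ^ n).testBit n = false := by simp [Nat.testBit_xor, hs]
  rw [Finset.disjoint_left]
  intro t h1 h2
  rw [mem_Dset] at h1 h2
  have htb : t.testBit n = true := by
    cases hb : t.testBit n
    · have hxb : (s ^^^ t).testBit n = true := by simp [Nat.testBit_xor, hs, hb]
      have := Nat.ge_two_pow_of_testBit hxb
      omega
    · rfl
  have := pv_or_eq_iff_forall.mp h2.2.1 n htb
  rw [hs'] at this
  exact absurd this (by simp)

theorem mtrans_one_closed (n : Nat) : ∀ (f : Nat → Int) (s : Nat),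
    mtrans 1 n f s = ∑ t ∈ Dset n s, f t := by
  induction n with
  | zero => intro f s; rw [Dset_zero, Finset.sum_singleton]; rfl
  | succ n ih =>
    intro f s
    rw [mtrans_succ]
    simp only [mpass]
    by_cases hb : s.testBit n
    · rw [if_pos hb, ih f s, ih f (s ^^^ 2 ^ n), Dset_succ_of_bit hb,
        Finset.sum_union (Dset_disjoint_of_bit hb)]
      ring
    · rw [if_neg hb, ih f s, Dset_succ_of_not (by simpa using hb)]


-- ===== bridging the list-level folds to the mathematical layer =====

theorem pv_butterflyMasks_pow (n Z : Nat) :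
    pvButterflyMasks n Z = (List.range n).flatMap (fun i => pvMaskRun (2 ^ i) Z (2 ^ i)) := by
  simp [pvButterflyMasks, Nat.one_shiftLeft]

theorem pv_butterfly_bridge (c : Int) (n : Nat) (X : List Int) :
    ((pvButterflyMasks n X.length).foldl
      (fun (D : List Int) p => D.set p.2 (geti D p.2 + c * geti D p.1)) X).length = X.length ∧
    ∀ s < X.length,
      geti ((pvButterflyMasks n X.length).foldl
        (fun (D : List Int) p => D.set p.2 (geti D p.2 + c * geti D p.1)) X) s =
      mtrans c n (fun t => geti X t) s := by
  rw [pv_butterflyMasks_pow]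
  induction n with
  | zero => exact ⟨rfl, fun s _ => rfl⟩
  | succ n ih =>
    rw [List.range_succ, List.flatMap_append, List.foldl_append]
    obtain ⟨ihlen, ihval⟩ := ih
    set Rn := ((List.range n).flatMap (fun i => pvMaskRun (2 ^ i) X.length (2 ^ i))).foldl
      (fun (D : List Int) p => D.set p.2 (geti D p.2 + c * geti D p.1)) X with hRn
    simp only [List.flatMap_cons, List.flatMap_nil, List.append_nil]
    have hbitb : (2 ^ n).testBit n = true := by simp [Nat.testBit_two_pow]
    have hmem := pv_maskRun_mem (i := n) (Z := X.length) (2 ^ n) hbitb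
    have hw : ∀ u ∈ pvMaskRun (2 ^ n) X.length (2 ^ n), u.2 < Rn.length := by
      intro u hu; rw [ihlen]; exact (hmem u hu).2.2.1
    have hnr : ∀ u ∈ pvMaskRun (2 ^ n) X.length (2 ^ n),
        ∀ v ∈ pvMaskRun (2 ^ n) X.length (2 ^ n), u.1 ≠ v.2 := by
      intro u hu v hv
      obtain ⟨hu1, hu2, -, -⟩ := hmem u hu
      obtain ⟨-, hv2, -, -⟩ := hmem v hv
      intro hcon
      have : u.1.testBit n = false := by rw [hu1]; simp [Nat.testBit_xor, hu2]
      rw [hcon, hv2] at this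
      exact absurd this (by simp)
    obtain ⟨flen, fval⟩ := pv_rwFold (fun a b => a + c * b) (pvMaskRun (2 ^ n) X.length (2 ^ n))
      Rn Rn rfl hw (fun u _ => rfl) hnr
    constructor
    · rw [flen, ihlen]
    · intro s hs
      rw [fval s, pv_maskRun_filter (2 ^ n) hbitb, mtrans_succ]
      simp only [mpass]
      by_cases hbit : s.testBit n
      · have hge : 2 ^ n ≤ s := Nat.ge_two_pow_of_testBit hbit
        rw [if_pos ⟨hge, hs, hbit⟩, List.foldl_cons, List.foldl_nil, if_pos hbit]
        have hlt : s ^^^ 2 ^ n < s := pv_xor_two_pow_lt hbit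
        rw [ihval s hs, ihval (s ^^^ 2 ^ n) (by omega)]
      · rw [if_neg (by rintro ⟨-, -, hc⟩; exact hbit hc), List.foldl_nil, if_neg hbit]
        exact ihval s hs


theorem geti_replicate (k m : Nat) : geti (List.replicate k (0:Int)) m = 0 := by
  simp [geti, List.getD_eq_getElem?_getD, List.getElem?_replicate]
  split <;> rfl

theorem pv_filter_range_single {P : Nat → Bool} {b a : Nat} (h : ∀ m, P m = true ↔ m = a) :
    (List.range b).filter P = if a < b then [a] else [] := by
  induction b with
  | zero => simp
  | succ b ih =>
    rw [List.range_succ, List.filter_append, ih]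
    by_cases hba : b = a
    · subst hba
      rw [if_neg (lt_irrefl b), if_pos (Nat.lt_succ_self b)]
      simp [(h b).mpr rfl]
    · have hPb : P b = false := by
        cases hPb : P b
        · rfl
        · exact absurd ((h b).mp hPb) hba
      simp only [List.filter_cons, List.filter_nil, hPb, Bool.false_eq_true, if_false,
        List.append_nil]
      by_cases hab : a < b
      · rw [if_pos hab, if_pos (by omega)]
      · rw [if_neg hab, if_neg (by omega)]

theorem pv_xor_window {i s : Nat} : s ^^^ 2 ^ i < 2 ^ i ↔ 2 ^ i ≤ s ∧ s < 2 ^ i + 2 ^ i := by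
  constructor
  · intro h
    have hb : s.testBit i = true := by
      cases hb : s.testBit i
      · rw [pv_xor_two_pow_add hb] at h; omega
      · rfl
    have hsub := pv_xor_two_pow_sub hb
    have hge := Nat.ge_two_pow_of_testBit hb
    omega
  · rintro ⟨h1, h2⟩
    have hb : s.testBit i = true := by
      rw [tb]
      have : s / 2 ^ i = 1 := Nat.div_eq_of_lt_le (by omega) (by omega)
      simp [this]
    have hsub := pv_xor_two_pow_sub hb
    omega

theorem pv_popcnts_spec (n : Nat) :
    (pvPopcnts n).length = 2 ^ n ∧ (∀ m, m < 2 ^ n → geti (pvPopcnts n) m = (pc m : Int)) := by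
  unfold pvPopcnts
  simp only [Nat.one_shiftLeft]
  have H : ∀ i, i ≤ n →
      ((List.range i).foldl
        (fun P j => (List.range (2 ^ j)).foldl
          (fun P m => P.set (m ^^^ 2 ^ j) (geti P m + 1)) P)
        (List.replicate (2 ^ n) 0)).length = 2 ^ n ∧
      (∀ m, m < 2 ^ i →
        geti ((List.range i).foldl
          (fun P j => (List.range (2 ^ j)).foldl
            (fun P m => P.set (m ^^^ 2 ^ j) (geti P m + 1)) P)
          (List.replicate (2 ^ n) 0)) m = (pc m : Int)) ∧
      (∀ m, 2 ^ i ≤ m →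
        geti ((List.range i).foldl
          (fun P j => (List.range (2 ^ j)).foldl
            (fun P m => P.set (m ^^^ 2 ^ j) (geti P m + 1)) P)
          (List.replicate (2 ^ n) 0)) m = 0) := by
    intro i
    induction i with
    | zero =>
      intro _
      simp only [List.range_zero, List.foldl_nil]
      refine ⟨by simp, fun m hm => ?_, fun m hm => geti_replicate _ _⟩
      have : m = 0 := by omega
      subst this
      rw [geti_replicate, pc_zero]
      rfl
    | succ i ih =>
      intro hin
      obtain ⟨ihlen, ihlow, ihhigh⟩ := ih (by omega)
      rw [List.range_succ, List.foldl_append, List.foldl_cons, List.foldl_nil]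
      set Pi := (List.range i).foldl
        (fun P j => (List.range (2 ^ j)).foldl
          (fun P m => P.set (m ^^^ 2 ^ j) (geti P m + 1)) P)
        (List.replicate (2 ^ n) 0) with hPi
      have hb0 : (2:Nat) ^ i ≤ 2 ^ n := Nat.pow_le_pow_right (by norm_num) (by omega)
      have hb1 : (2:Nat) ^ i + 2 ^ i ≤ 2 ^ n := by
        have : (2:Nat) ^ (i + 1) ≤ 2 ^ n := Nat.pow_le_pow_right (by norm_num) (by omega)
        rw [pow_succ] at this
        omega
      have hconv : (List.range (2 ^ i)).foldl
          (fun P m => P.set (m ^^^ 2 ^ i) (geti P m + 1)) Pi =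
          ((List.range (2 ^ i)).map (fun m => (m, m ^^^ 2 ^ i))).foldl
            (fun (D : List Int) p => D.set p.2 ((fun _ b => b + (1:Int)) (geti D p.2) (geti D p.1)))
            Pi := by
        rw [List.foldl_map]
      rw [hconv]
      have hw : ∀ u ∈ (List.range (2 ^ i)).map (fun m => (m, m ^^^ 2 ^ i)), u.2 < Pi.length := by
        intro u hu
        obtain ⟨m, hm, rfl⟩ := List.mem_map.mp hu
        rw [List.mem_range] at hm
        have hbf : m.testBit i = false := Nat.testBit_lt_two_pow hm
        rw [ihlen]
        have := pv_xor_two_pow_add hbf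
        omega
      have hnr : ∀ u ∈ (List.range (2 ^ i)).map (fun m => (m, m ^^^ 2 ^ i)),
          ∀ v ∈ (List.range (2 ^ i)).map (fun m => (m, m ^^^ 2 ^ i)), u.1 ≠ v.2 := by
        intro u hu v hv
        obtain ⟨m1, hm1, rfl⟩ := List.mem_map.mp hu
        obtain ⟨m2, hm2, rfl⟩ := List.mem_map.mp hv
        rw [List.mem_range] at hm1 hm2
        have hbf : m2.testBit i = false := Nat.testBit_lt_two_pow hm2
        have := pv_xor_two_pow_add hbf
        show m1 ≠ m2 ^^^ 2 ^ i
        omega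
      obtain ⟨flen, fval⟩ := pv_rwFold (fun _ b => b + 1)
        ((List.range (2 ^ i)).map (fun m => (m, m ^^^ 2 ^ i))) Pi Pi rfl hw (fun u _ => rfl) hnr
      have hfilter : ∀ s : Nat,
          (((List.range (2 ^ i)).map (fun m => (m, m ^^^ 2 ^ i))).filter (fun u => u.2 = s)) =
          if s ^^^ 2 ^ i < 2 ^ i then [(s ^^^ 2 ^ i, s)] else [] := by
        intro s
        rw [List.filter_map]
        have : ((List.range (2 ^ i)).filter
            ((fun u => decide (u.2 = s)) ∘ (fun m => (m, m ^^^ 2 ^ i)))) =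
            if s ^^^ 2 ^ i < 2 ^ i then [s ^^^ 2 ^ i] else [] := by
          apply pv_filter_range_single
          intro m
          simp only [Function.comp_apply, decide_eq_true_eq]
          constructor
          · rintro rfl; rw [Nat.xor_cancel_right]
          · rintro rfl; rw [Nat.xor_cancel_right]
        rw [this]
        split
        · rw [List.map_cons, List.map_nil, Nat.xor_cancel_right]
        · rw [List.map_nil]
      refine ⟨by rw [flen, ihlen], fun m hm => ?_, fun m hm => ?_⟩
      · rw [fval m, hfilter m]
        by_cases hwin : m ^^^ 2 ^ i < 2 ^ i
        · have hrange := pv_xor_window.mp hwin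
          rw [if_pos hwin, List.foldl_cons, List.foldl_nil]
          have hmb : m.testBit i = true := by
            rw [tb]
            have : m / 2 ^ i = 1 := Nat.div_eq_of_lt_le (by omega) (by omega)
            simp [this]
          have hsub := pv_xor_two_pow_sub hmb
          have hlow := ihlow (m ^^^ 2 ^ i) (by omega)
          rw [hlow]
          have hbf : (m ^^^ 2 ^ i).testBit i = false := by
            simp [Nat.testBit_xor, hmb]
          have : pc ((m ^^^ 2 ^ i) ^^^ 2 ^ i) = pc (m ^^^ 2 ^ i) + 1 := pc_xor_two_pow hbf
          rw [Nat.xor_cancel_right] at this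
          rw [this]
          push_cast
          ring
        · rw [if_neg hwin, List.foldl_nil]
          rw [pow_succ] at hm
          by_cases hge : 2 ^ i ≤ m
          · exact absurd (pv_xor_window.mpr ⟨hge, by omega⟩) hwin
          · exact ihlow m (by omega)
      · rw [fval m, hfilter m]
        have hnotwin : ¬ (m ^^^ 2 ^ i < 2 ^ i) := by
          intro h
          obtain ⟨h1, h2⟩ := pv_xor_window.mp h
          rw [pow_succ] at hm
          omega
        rw [if_neg hnotwin, List.foldl_nil]
        exact ihhigh m (by rw [pow_succ] at hm; omega)
  obtain ⟨hlen, hlow, -⟩ := H n (le_refl n)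
  exact ⟨hlen, hlow⟩


-- ===== block decomposition lemmas (index p * 2^n + k, k < 2^n) =====

theorem pv_testBit_mul_pow (d n j : Nat) :
    (d * 2 ^ n).testBit j = (decide (j ≥ n) && d.testBit (j - n)) := by
  rw [← Nat.shiftLeft_eq, Nat.testBit_shiftLeft]

theorem pv_block_or {d k n : Nat} (hk : k < 2 ^ n) : (d * 2 ^ n) ||| k = d * 2 ^ n + k := by
  apply pv_or_eq_add
  apply Nat.eq_of_testBit_eq
  intro j
  rw [Nat.testBit_and, pv_testBit_mul_pow, Nat.zero_testBit]
  by_cases hj : j < n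
  · simp [(show ¬ j ≥ n by omega)]
  · have : k < 2 ^ j := lt_of_lt_of_le hk (Nat.pow_le_pow_right (by norm_num) (by omega))
    simp [Nat.testBit_lt_two_pow this]

theorem pv_testBit_block {p k n j : Nat} (hk : k < 2 ^ n) :
    (p * 2 ^ n + k).testBit j = if j < n then k.testBit j else p.testBit (j - n) := by
  rw [← pv_block_or hk, Nat.testBit_lor, pv_testBit_mul_pow]
  by_cases hj : j < n
  · simp [hj, (show ¬ j ≥ n by omega)]
  · simp only [if_neg hj]
    have : k < 2 ^ j := lt_of_lt_of_le hk (Nat.pow_le_pow_right (by norm_num) (by omega))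
    simp [Nat.testBit_lt_two_pow this, (show j ≥ n by omega)]

theorem pv_block_div {p k n : Nat} (hk : k < 2 ^ n) : (p * 2 ^ n + k) / 2 ^ n = p := by
  rw [Nat.mul_comm p, Nat.mul_add_div (Nat.two_pow_pos n), Nat.div_eq_of_lt hk]
  omega

theorem pv_block_mod {p k n : Nat} (hk : k < 2 ^ n) : (p * 2 ^ n + k) % 2 ^ n = k := by
  rw [Nat.mul_comm p, Nat.mul_add_mod, Nat.mod_eq_of_lt hk]

theorem pv_block_inj {p p' k k' n : Nat} (hk : k < 2 ^ n) (hk' : k' < 2 ^ n)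
    (h : p * 2 ^ n + k = p' * 2 ^ n + k') : p = p' ∧ k = k' := by
  have hp : p = p' := by
    have h1 := pv_block_div (p := p) hk
    have h2 := pv_block_div (p := p') hk'
    rw [h] at h1
    rw [h1] at h2
    omega
  subst hp
  exact ⟨rfl, by omega⟩

theorem pv_block_xor {p k t n : Nat} (hk : k < 2 ^ n) (ht : t < 2 ^ n) :
    (p * 2 ^ n + k) ^^^ (p * 2 ^ n + t) = k ^^^ t := by
  apply Nat.eq_of_testBit_eq
  intro j
  rw [Nat.testBit_xor, Nat.testBit_xor, pv_testBit_block hk, pv_testBit_block ht]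
  by_cases hj : j < n
  · simp [hj]
  · have hkj : k < 2 ^ j := lt_of_lt_of_le hk (Nat.pow_le_pow_right (by norm_num) (by omega))
    have htj : t < 2 ^ j := lt_of_lt_of_le ht (Nat.pow_le_pow_right (by norm_num) (by omega))
    simp [hj, Nat.testBit_lt_two_pow hkj, Nat.testBit_lt_two_pow htj]

theorem pv_block_or2 {p k t n : Nat} (hk : k < 2 ^ n) (ht : t < 2 ^ n) :
    (p * 2 ^ n + t) ||| (p * 2 ^ n + k) = p * 2 ^ n + (t ||| k) := by
  have hor : t ||| k < 2 ^ n := Nat.or_lt_two_pow ht hk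
  apply Nat.eq_of_testBit_eq
  intro j
  rw [Nat.testBit_lor, pv_testBit_block hk, pv_testBit_block ht, pv_testBit_block hor,
    Nat.testBit_lor]
  by_cases hj : j < n
  · simp [hj]
  · simp [hj]

theorem Dset_block {p k n : Nat} (hk : k < 2 ^ n) :
    Dset n (p * 2 ^ n + k) = (Dset n k).image (fun t => p * 2 ^ n + t) := by
  ext t'
  rw [mem_Dset, Finset.mem_image]
  constructor
  · rintro ⟨h1, h2, h3⟩
    have hhigh : ∀ j, n ≤ j → t'.testBit j = (p * 2 ^ n + k).testBit j := by
      intro j hj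
      have : ((p * 2 ^ n + k) ^^^ t').testBit j = false :=
        Nat.testBit_lt_two_pow (lt_of_lt_of_le h3 (Nat.pow_le_pow_right (by norm_num) hj))
      rw [Nat.testBit_xor] at this
      cases ha : (p * 2 ^ n + k).testBit j <;> cases hb : t'.testBit j <;>
        simp [ha, hb] at this ⊢
    have hdiv : t' / 2 ^ n = p := by
      have : t' / 2 ^ n = (p * 2 ^ n + k) / 2 ^ n := by
        apply Nat.eq_of_testBit_eq
        intro j
        rw [Nat.testBit_div_two_pow, Nat.testBit_div_two_pow]
        exact hhigh (j + n) (by omega)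
      rw [this, pv_block_div hk]
    set u := t' % 2 ^ n with hu
    have hulow : u < 2 ^ n := Nat.mod_lt _ (Nat.two_pow_pos n)
    have ht' : t' = p * 2 ^ n + u := by
      have hdm := Nat.div_add_mod t' (2 ^ n)
      rw [hdiv] at hdm
      rw [Nat.mul_comm p (2 ^ n)]
      omega
    refine ⟨u, mem_Dset.mpr ⟨?_, ?_, ?_⟩, ht'.symm⟩
    · have huor : u ||| k = k := by
        rw [pv_or_eq_iff_forall]
        intro j hbj
        by_cases hj : j < n
        · have h1 := pv_or_eq_iff_forall.mp h2 j
          rw [ht', pv_testBit_block hulow] at h1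
          have h2' := h1 (by simp [hj, hbj])
          rw [pv_testBit_block hk, if_pos hj] at h2'
          exact h2'
        · have : u < 2 ^ j := lt_of_lt_of_le hulow (Nat.pow_le_pow_right (by norm_num) (by omega))
          rw [Nat.testBit_lt_two_pow this] at hbj
          exact absurd hbj (by simp)
      exact pv_le_of_or_eq huor
    · rw [pv_or_eq_iff_forall]
      intro j hbj
      by_cases hj : j < n
      · have h1 := pv_or_eq_iff_forall.mp h2 j
        rw [ht', pv_testBit_block hulow] at h1
        have h2' := h1 (by simp [hj, hbj])
        rw [pv_testBit_block hk, if_pos hj] at h2'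
        exact h2'
      · have : u < 2 ^ j := lt_of_lt_of_le hulow (Nat.pow_le_pow_right (by norm_num) (by omega))
        rw [Nat.testBit_lt_two_pow this] at hbj
        exact absurd hbj (by simp)
    · rw [ht', pv_block_xor hk hulow] at h3
      exact h3
  · rintro ⟨u, hu, rfl⟩
    rw [mem_Dset] at hu
    obtain ⟨hu1, hu2, hu3⟩ := hu
    have hulow : u < 2 ^ n := lt_of_le_of_lt hu1 hk
    refine ⟨by omega, ?_, ?_⟩
    · rw [pv_block_or2 hk hulow, hu2]
    · rw [pv_block_xor hk hulow]
      exact hu3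


-- ===== enumerate characterization =====

theorem pv_enumerate_eq (l : List Int) : ∀ st : Int,
    PySem.List.enumerate l st =
      (List.range l.length).map (fun k : Nat => (st + (k : Int), l.getD k 0)) := by
  induction l with
  | nil => intro st; rfl
  | cons a t ih =>
    intro st
    show (st, a) :: PySem.List.enumerate t (st + 1) = _
    rw [ih (st + 1), List.length_cons, List.range_succ_eq_map, List.map_cons, List.map_map]
    simp only [Nat.cast_zero, add_zero, List.getD_cons_zero]
    congr 1
    apply List.map_congr_left
    intro k _
    simp only [Function.comp_apply, List.getD_cons_succ, Nat.succ_eq_add_one]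
    have : st + 1 + (k : Int) = st + ((k : Nat) + 1 : Nat) := by push_cast; ring
    rw [this]

theorem pv_place_spec (V : List Int) (n Z : Nat) (hZ : Z = (n + 1) * 2 ^ n) :
    ((PySem.List.enumerate (pvPopcnts n) 0).foldl
      (fun (X : List Int) pi => X.set ((pi.2.toNat <<< n) ||| pi.1.toNat) (geti V pi.1.toNat))
      (List.replicate Z 0)).length = Z ∧
    ∀ p k, p ≤ n → k < 2 ^ n →
      geti ((PySem.List.enumerate (pvPopcnts n) 0).foldl
        (fun (X : List Int) pi => X.set ((pi.2.toNat <<< n) ||| pi.1.toNat) (geti V pi.1.toNat))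
        (List.replicate Z 0)) (p * 2 ^ n + k) =
      if pc k = p then geti V k else 0 := by
  obtain ⟨hPlen, hPval⟩ := pv_popcnts_spec n
  rw [pv_enumerate_eq, hPlen, List.foldl_map]
  dsimp only
  simp only [zero_add, Int.toNat_natCast]
  have hidx : ∀ k, k < 2 ^ n →
      ((((pvPopcnts n).getD k 0).toNat <<< n) ||| k) = pc k * 2 ^ n + k := by
    intro k hk
    have : (pvPopcnts n).getD k 0 = (pc k : Int) := hPval k hk
    rw [this]
    simp only [Int.toNat_natCast, Nat.shiftLeft_eq]
    exact pv_block_or hk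
  obtain ⟨flen, funt, fval⟩ := pv_setFold
    (fun k : Nat => (((pvPopcnts n).getD k 0).toNat <<< n) ||| k)
    (fun k : Nat => geti V k)
    (List.range (2 ^ n)) (List.replicate Z 0)
    (by
      intro u hu
      rw [List.mem_range] at hu
      dsimp only
      rw [hidx u hu, List.length_replicate, hZ]
      have hpc : pc u ≤ n := pc_le hu
      have : pc u * 2 ^ n ≤ n * 2 ^ n := Nat.mul_le_mul_right _ hpc
      nlinarith [Nat.two_pow_pos n])
    (by
      intro u hu v hv h
      rw [List.mem_range] at hu hv
      dsimp only at h
      rw [hidx u hu, hidx v hv] at h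
      exact (pv_block_inj hu hv h).2)
  refine ⟨flen.trans (List.length_replicate), fun p k hp hk => ?_⟩
  by_cases hpc : pc k = p
  · have := fval k (List.mem_range.mpr hk)
    rw [hidx k hk, hpc] at this
    rw [this, if_pos hpc]
  · rw [if_neg hpc, funt (p * 2 ^ n + k) ?_, geti_replicate]
    intro u hu
    rw [List.mem_range] at hu
    rw [hidx u hu]
    intro hcon
    obtain ⟨h1, h2⟩ := pv_block_inj hu hk hcon
    exact hpc (h2 ▸ h1)

theorem pv_writeback_spec (A Cr : List Int) (n : Nat) (hlen : 2 ^ n ≤ A.length) :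
    ((PySem.List.enumerate (pvPopcnts n) 0).foldl
      (fun (X : List Int) pi => X.set pi.1.toNat (geti Cr ((pi.2.toNat <<< n) ||| pi.1.toNat)))
      A).length = A.length ∧
    (∀ s, s < 2 ^ n →
      geti ((PySem.List.enumerate (pvPopcnts n) 0).foldl
        (fun (X : List Int) pi => X.set pi.1.toNat (geti Cr ((pi.2.toNat <<< n) ||| pi.1.toNat)))
        A) s = geti Cr (pc s * 2 ^ n + s)) ∧
    (∀ s, 2 ^ n ≤ s →
      geti ((PySem.List.enumerate (pvPopcnts n) 0).foldl
        (fun (X : List Int) pi => X.set pi.1.toNat (geti Cr ((pi.2.toNat <<< n) ||| pi.1.toNat)))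
        A) s = geti A s) := by
  obtain ⟨hPlen, hPval⟩ := pv_popcnts_spec n
  rw [pv_enumerate_eq, hPlen, List.foldl_map]
  dsimp only
  simp only [zero_add, Int.toNat_natCast]
  have hidx : ∀ k, k < 2 ^ n →
      ((((pvPopcnts n).getD k 0).toNat <<< n) ||| k) = pc k * 2 ^ n + k := by
    intro k hk
    have : (pvPopcnts n).getD k 0 = (pc k : Int) := hPval k hk
    rw [this]
    simp only [Int.toNat_natCast, Nat.shiftLeft_eq]
    exact pv_block_or hk
  obtain ⟨flen, funt, fval⟩ := pv_setFold
    (fun k : Nat => k)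
    (fun k : Nat => geti Cr ((((pvPopcnts n).getD k 0).toNat <<< n) ||| k))
    (List.range (2 ^ n)) A
    (by
      intro u hu
      rw [List.mem_range] at hu
      exact lt_of_lt_of_le hu hlen)
    (by
      intro u hu v hv h
      exact h)
  refine ⟨flen, fun s hs => ?_, fun s hs => ?_⟩
  · have hv := fval s (List.mem_range.mpr hs)
    rw [hv, hidx s hs]
  · rw [funt s ?_]
    intro u hu
    rw [List.mem_range] at hu
    omega


theorem pv_sum_range (m : Nat) (f : Nat → Int) :
    ((List.range m).map f).sum = ∑ x ∈ Finset.range m, f x := rfl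

theorem pv_stepRange_mul (c M : Nat) (hM : 0 < M) :
    pvStepRange (c * M) M = (List.range c).map (· * M) := by
  unfold pvStepRange
  congr 2
  rw [Nat.mul_comm]
  have h1 : M * c + M - 1 = M * c + (M - 1) := by omega
  rw [h1, Nat.mul_add_div hM, Nat.div_eq_of_lt (by omega)]
  omega

theorem pv_filter_range_add (b base s : Nat) :
    (List.range b).filter (fun k => decide (base + k = s)) =
    if base ≤ s ∧ s < base + b then [s - base] else [] := by
  by_cases hle : base ≤ s
  · rw [pv_filter_range_single (a := s - base) (by intro m; simp; omega)]
    by_cases h2 : s - base < b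
    · rw [if_pos h2, if_pos ⟨hle, by omega⟩]
    · rw [if_neg h2, if_neg (by omega)]
  · rw [if_neg (by omega)]
    apply List.filter_eq_nil_iff.mpr
    intro k _
    simp
    omega

theorem pv_window_iff {a r k M : Nat} (hk : k < M) :
    (a * M ≤ r * M + k ∧ r * M + k < a * M + M) ↔ a = r := by
  constructor
  · rintro ⟨h1, h2⟩
    have hM : 0 < M := by omega
    have hd : (r * M + k) / M = a := by
      apply Nat.div_eq_of_lt_le h1
      rw [add_mul, one_mul]
      omega
    have hd2 : (r * M + k) / M = r := by
      rw [Nat.mul_comm r M] at hd ⊢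
      rw [Nat.mul_add_div hM, Nat.div_eq_of_lt hk]
      rw [Nat.mul_add_div hM, Nat.div_eq_of_lt hk] at hd
      omega
    omega
  · rintro rfl
    omega

theorem pv_multiply_spec (Ar Br : List Int) (n : Nat) :
    ((pvStepRange ((n + 1) * 2 ^ n) (2 ^ n)).foldl
      (fun Cr i => (pvStepRange ((n + 1) * 2 ^ n - i) (2 ^ n)).foldl
        (fun Cr j => (List.range (2 ^ n)).foldl
          (fun (Cr : List Int) k => Cr.set ((i + j) ||| k)
            (geti Cr ((i + j) ||| k) + geti Ar (i ||| k) * geti Br (j ||| k))) Cr) Cr)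
      (List.replicate ((n + 1) * 2 ^ n) 0)).length = (n + 1) * 2 ^ n ∧
    ∀ r k, r ≤ n → k < 2 ^ n →
      geti ((pvStepRange ((n + 1) * 2 ^ n) (2 ^ n)).foldl
        (fun Cr i => (pvStepRange ((n + 1) * 2 ^ n - i) (2 ^ n)).foldl
          (fun Cr j => (List.range (2 ^ n)).foldl
            (fun (Cr : List Int) k => Cr.set ((i + j) ||| k)
              (geti Cr ((i + j) ||| k) + geti Ar (i ||| k) * geti Br (j ||| k))) Cr) Cr)
        (List.replicate ((n + 1) * 2 ^ n) 0)) (r * 2 ^ n + k) =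
      ∑ p ∈ Finset.range (r + 1), geti Ar (p * 2 ^ n + k) * geti Br ((r - p) * 2 ^ n + k) := by
  have hM : (0:Nat) < 2 ^ n := Nat.two_pow_pos n
  have hinner : ∀ p : Nat, p ≤ n → ∀ C : List Int, C.length = (n + 1) * 2 ^ n →
      ((pvStepRange ((n + 1) * 2 ^ n - p * 2 ^ n) (2 ^ n)).foldl
        (fun Cr j => (List.range (2 ^ n)).foldl
          (fun (Cr : List Int) k => Cr.set ((p * 2 ^ n + j) ||| k)
            (geti Cr ((p * 2 ^ n + j) ||| k) +
              geti Ar ((p * 2 ^ n) ||| k) * geti Br (j ||| k))) Cr) C).length = C.length ∧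
      ∀ s : Nat, geti ((pvStepRange ((n + 1) * 2 ^ n - p * 2 ^ n) (2 ^ n)).foldl
        (fun Cr j => (List.range (2 ^ n)).foldl
          (fun (Cr : List Int) k => Cr.set ((p * 2 ^ n + j) ||| k)
            (geti Cr ((p * 2 ^ n + j) ||| k) +
              geti Ar ((p * 2 ^ n) ||| k) * geti Br (j ||| k))) Cr) C) s =
        geti C s + ((List.range (n + 1 - p)).map (fun q =>
          if (p + q) * 2 ^ n ≤ s ∧ s < (p + q) * 2 ^ n + 2 ^ n then
            geti Ar ((p * 2 ^ n) ||| (s - (p + q) * 2 ^ n)) *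
            geti Br ((q * 2 ^ n) ||| (s - (p + q) * 2 ^ n))
          else 0)).sum := by
    intro p hp C hC
    have hsub : (n + 1) * 2 ^ n - p * 2 ^ n = (n + 1 - p) * 2 ^ n := by
      rw [← Nat.sub_mul]
    rw [hsub, pv_stepRange_mul _ _ hM, List.foldl_map]
    exact pv_sumFold (ι := Nat)
      (fun q s =>
          if (p + q) * 2 ^ n ≤ s ∧ s < (p + q) * 2 ^ n + 2 ^ n then
            geti Ar ((p * 2 ^ n) ||| (s - (p + q) * 2 ^ n)) *
            geti Br ((q * 2 ^ n) ||| (s - (p + q) * 2 ^ n))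
          else 0)
      (fun Cr q => (List.range (2 ^ n)).foldl
          (fun (Cr : List Int) k => Cr.set ((p * 2 ^ n + q * 2 ^ n) ||| k)
            (geti Cr ((p * 2 ^ n + q * 2 ^ n) ||| k) +
              geti Ar ((p * 2 ^ n) ||| k) * geti Br ((q * 2 ^ n) ||| k))) Cr)
      (List.range (n + 1 - p)) C (by
      intro D q hq hD
      rw [List.mem_range] at hq
      have hplus : (p * 2 ^ n + q * 2 ^ n) = (p + q) * 2 ^ n := by ring
      obtain ⟨alen, aval⟩ := pv_addFold (ι := Nat)
        (fun k => (p * 2 ^ n + q * 2 ^ n) ||| k)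
        (fun k => geti Ar ((p * 2 ^ n) ||| k) * geti Br ((q * 2 ^ n) ||| k))
        (List.range (2 ^ n)) D (by
          intro u hu
          rw [List.mem_range] at hu
          dsimp only
          rw [hplus, pv_block_or hu, hD, hC]
          have h1 : p + q ≤ n := by omega
          have h2 : (p + q) * 2 ^ n + 2 ^ n ≤ (n + 1) * 2 ^ n := by
            have h3 : (p + q + 1) * 2 ^ n ≤ (n + 1) * 2 ^ n := Nat.mul_le_mul_right _ (by omega)
            rw [add_mul, one_mul] at h3
            omega
          omega)
      refine ⟨alen, fun s => ?_⟩
      rw [aval s]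
      congr 1
      dsimp only
      have hfil : ((List.range (2 ^ n)).filter
          (fun k => ((p * 2 ^ n + q * 2 ^ n) ||| k) = s)) =
          (List.range (2 ^ n)).filter (fun k => decide ((p + q) * 2 ^ n + k = s)) := by
        apply List.filter_congr
        intro k hk
        rw [List.mem_range] at hk
        rw [hplus, pv_block_or hk]
      rw [hfil, pv_filter_range_add]
      by_cases hwin : (p + q) * 2 ^ n ≤ s ∧ s < (p + q) * 2 ^ n + 2 ^ n
      · rw [if_pos hwin, if_pos hwin, List.map_cons, List.map_nil, List.sum_cons,
          List.sum_nil]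
        ring
      · rw [if_neg hwin, if_neg hwin, List.map_nil, List.sum_nil])
  rw [pv_stepRange_mul _ _ hM, List.foldl_map]
  obtain ⟨olen, oval⟩ := pv_sumFold (ι := Nat)
    (fun p s =>
      if p ≤ n then
        ((List.range (n + 1 - p)).map (fun q =>
          if (p + q) * 2 ^ n ≤ s ∧ s < (p + q) * 2 ^ n + 2 ^ n then
            geti Ar ((p * 2 ^ n) ||| (s - (p + q) * 2 ^ n)) *
            geti Br ((q * 2 ^ n) ||| (s - (p + q) * 2 ^ n))
          else 0)).sum
      else 0)
    (fun Cr p => (pvStepRange ((n + 1) * 2 ^ n - p * 2 ^ n) (2 ^ n)).foldl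
        (fun Cr j => (List.range (2 ^ n)).foldl
          (fun (Cr : List Int) k => Cr.set ((p * 2 ^ n + j) ||| k)
            (geti Cr ((p * 2 ^ n + j) ||| k) +
              geti Ar ((p * 2 ^ n) ||| k) * geti Br (j ||| k))) Cr) Cr)
    (List.range (n + 1)) (List.replicate ((n + 1) * 2 ^ n) 0) (by
    intro D p hp hD
    rw [List.mem_range] at hp
    have hple : p ≤ n := by omega
    obtain ⟨ilen, ival⟩ := hinner p hple D (by rw [hD, List.length_replicate])
    simp only [if_pos hple]
    exact ⟨ilen, ival⟩)
  constructor
  · rw [olen, List.length_replicate]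
  · intro r k hr hk
    rw [oval (r * 2 ^ n + k), geti_replicate, pv_sum_range]
    rw [zero_add]
    have hterm : ∀ p ∈ Finset.range (n + 1),
        (if p ≤ n then
          ((List.range (n + 1 - p)).map (fun q =>
            if (p + q) * 2 ^ n ≤ r * 2 ^ n + k ∧ r * 2 ^ n + k < (p + q) * 2 ^ n + 2 ^ n then
              geti Ar ((p * 2 ^ n) ||| (r * 2 ^ n + k - (p + q) * 2 ^ n)) *
              geti Br ((q * 2 ^ n) ||| (r * 2 ^ n + k - (p + q) * 2 ^ n))
            else 0)).sum
        else 0) =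
        if p ≤ r then geti Ar (p * 2 ^ n + k) * geti Br ((r - p) * 2 ^ n + k) else 0 := by
      intro p hp
      rw [Finset.mem_range] at hp
      rw [if_pos (by omega : p ≤ n), pv_sum_range]
      have hqterm : ∀ q ∈ Finset.range (n + 1 - p),
          (if (p + q) * 2 ^ n ≤ r * 2 ^ n + k ∧ r * 2 ^ n + k < (p + q) * 2 ^ n + 2 ^ n then
            geti Ar ((p * 2 ^ n) ||| (r * 2 ^ n + k - (p + q) * 2 ^ n)) *
            geti Br ((q * 2 ^ n) ||| (r * 2 ^ n + k - (p + q) * 2 ^ n))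
          else 0) =
          if q = r - p ∧ p ≤ r then
            geti Ar (p * 2 ^ n + k) * geti Br ((r - p) * 2 ^ n + k) else 0 := by
        intro q hq
        rw [Finset.mem_range] at hq
        by_cases hwin : (p + q) * 2 ^ n ≤ r * 2 ^ n + k ∧ r * 2 ^ n + k < (p + q) * 2 ^ n + 2 ^ n
        · have heq : p + q = r := pv_window_iff hk |>.mp hwin
          have hsub : r * 2 ^ n + k - (p + q) * 2 ^ n = k := by
            rw [heq]; omega
          have hq2 : q = r - p := by omega
          subst hq2
          rw [if_pos hwin, hsub, if_pos (by omega)]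
          rw [pv_block_or hk, pv_block_or hk]
        · rw [if_neg hwin, if_neg]
          rintro ⟨rfl, hpr⟩
          exact hwin (pv_window_iff hk |>.mpr (by omega))
      rw [Finset.sum_congr rfl hqterm]
      by_cases hpr : p ≤ r
      · have hsingle := Finset.sum_eq_single_of_mem (s := Finset.range (n + 1 - p))
          (f := fun q => if q = r - p ∧ p ≤ r then
            geti Ar (p * 2 ^ n + k) * geti Br ((r - p) * 2 ^ n + k) else 0)
          (r - p) (Finset.mem_range.mpr (by omega))
          (fun q hq hne => by dsimp only; rw [if_neg (by tauto)])
        rw [hsingle]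
        dsimp only
        rw [if_pos (⟨rfl, hpr⟩ : (r - p = r - p) ∧ p ≤ r), if_pos hpr]
      · rw [if_neg hpr]
        apply Finset.sum_eq_zero
        intro q hq
        rw [if_neg (by tauto)]
    rw [Finset.sum_congr rfl hterm]
    rw [← Finset.sum_subset (by
      intro x hx
      rw [Finset.mem_range] at hx ⊢
      omega : Finset.range (r + 1) ⊆ Finset.range (n + 1))]
    · apply Finset.sum_congr rfl
      intro p hp
      rw [Finset.mem_range] at hp
      rw [if_pos (by omega)]
    · intro p hp hnp
      rw [Finset.mem_range] at hp hnp
      rw [if_neg (by omega)]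


-- ===== the subset-convolution combinatorics =====

theorem mem_Dset_of {n t k : Nat} (h : t ||| k = k) (hk : k < 2 ^ n) : t ∈ Dset n k := by
  have hle : t ≤ k := pv_le_of_or_eq h
  rw [mem_Dset]
  exact ⟨hle, h, Nat.xor_lt_two_pow hk (by omega)⟩

theorem pv_or_trans {u t k : Nat} (h1 : u ||| t = t) (h2 : t ||| k = k) : u ||| k = k := by
  rw [← h2, ← Nat.lor_assoc, h1]

def pairSet (n r t : Nat) : Finset (Nat × Nat) :=
  ((Dset n t) ×ˢ (Dset n t)).filter (fun uv => uv.1 ||| uv.2 = t ∧ pc uv.1 + pc uv.2 = r)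

def X0 (f g : Nat → Int) (n r t : Nat) : Int := ∑ uv ∈ pairSet n r t, f uv.1 * g uv.2

theorem pv_fiber_eq {n k r : Nat} (hk : k < 2 ^ n) {t : Nat} (ht : t ∈ Dset n k) :
    Finset.filter (fun uv : Nat × Nat => uv.1 ||| uv.2 = t)
      (Finset.filter (fun uv : Nat × Nat => pc uv.1 + pc uv.2 = r) ((Dset n k) ×ˢ (Dset n k)))
      = pairSet n r t := by
  have htk := mem_Dset.mp ht
  have htlt : t < 2 ^ n := lt_of_le_of_lt htk.1 hk
  ext uv
  constructor
  · intro h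
    have h1 := Finset.mem_filter.mp h
    have h2 := Finset.mem_filter.mp h1.1
    have h3 := Finset.mem_product.mp h2.1
    have hor := h1.2
    refine Finset.mem_filter.mpr ⟨Finset.mem_product.mpr ⟨?_, ?_⟩, hor, h2.2⟩
    · exact mem_Dset_of (by rw [← hor, Nat.or_self_left]) htlt
    · exact mem_Dset_of (by rw [← hor, Nat.lor_comm uv.1 uv.2, Nat.or_self_left]) htlt
  · intro h
    have h1 := Finset.mem_filter.mp h
    have h2 := Finset.mem_product.mp h1.1
    have hu := mem_Dset.mp h2.1
    have hv := mem_Dset.mp h2.2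
    refine Finset.mem_filter.mpr
      ⟨Finset.mem_filter.mpr ⟨Finset.mem_product.mpr ⟨?_, ?_⟩, h1.2.2⟩, h1.2.1⟩
    · exact mem_Dset_of (pv_or_trans hu.2.1 htk.2.1) hk
    · exact mem_Dset_of (pv_or_trans hv.2.1 htk.2.1) hk

theorem pv_candidate_zeta (f g : Nat → Int) {n k : Nat} (hk : k < 2 ^ n) (r : Nat) :
    ∑ t ∈ Dset n k, X0 f g n r t =
    ∑ uv ∈ Finset.filter (fun uv : Nat × Nat => pc uv.1 + pc uv.2 = r)
      ((Dset n k) ×ˢ (Dset n k)), f uv.1 * g uv.2 := by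
  rw [← Finset.sum_fiberwise_of_maps_to (g := fun uv : Nat × Nat => uv.1 ||| uv.2)
    (t := Dset n k)
    (by
      intro uv huv
      have h1 := Finset.mem_filter.mp huv
      have h2 := Finset.mem_product.mp h1.1
      have hu := mem_Dset.mp h2.1
      have hv := mem_Dset.mp h2.2
      apply mem_Dset_of ?_ hk
      rw [Nat.lor_assoc, hv.2.1]
      exact hu.2.1)
    (fun uv => f uv.1 * g uv.2)]
  apply Finset.sum_congr rfl
  intro t ht
  rw [X0, ← pv_fiber_eq hk ht]

theorem pv_product_form (f g : Nat → Int) {n k : Nat} (r : Nat) :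
    ∑ p ∈ Finset.range (r + 1),
      (∑ u ∈ Dset n k, if pc u = p then f u else 0) *
      (∑ v ∈ Dset n k, if pc v = r - p then g v else 0) =
    ∑ uv ∈ Finset.filter (fun uv : Nat × Nat => pc uv.1 + pc uv.2 = r)
      ((Dset n k) ×ˢ (Dset n k)), f uv.1 * g uv.2 := by
  have hlhs : ∀ p ∈ Finset.range (r + 1),
      (∑ u ∈ Dset n k, if pc u = p then f u else 0) *
      (∑ v ∈ Dset n k, if pc v = r - p then g v else 0) =
      ∑ uv ∈ (Dset n k) ×ˢ (Dset n k),
        if pc uv.1 = p ∧ pc uv.2 = r - p then f uv.1 * g uv.2 else 0 := by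
    intro p _
    rw [Finset.sum_mul_sum, Finset.sum_product]
    apply Finset.sum_congr rfl
    intro u _
    apply Finset.sum_congr rfl
    intro v _
    by_cases h1 : pc u = p <;> by_cases h2 : pc v = r - p <;>
      simp [h1, h2]
  rw [Finset.sum_congr rfl hlhs, Finset.sum_comm, Finset.sum_filter]
  apply Finset.sum_congr rfl
  intro uv huv
  by_cases hc : pc uv.1 + pc uv.2 = r
  · rw [if_pos hc, Finset.sum_eq_single_of_mem (pc uv.1) (Finset.mem_range.mpr (by omega))
      (fun p hp hne => by rw [if_neg (fun hx => hne hx.1.symm)])]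
    rw [if_pos ⟨rfl, by omega⟩]
  · rw [if_neg hc]
    apply Finset.sum_eq_zero
    intro p hp
    rw [Finset.mem_range] at hp
    rw [if_neg]
    rintro ⟨ha, hb⟩
    omega

-- ===== glue layer: named pipeline stages and their characterizations =====

theorem pc_eq_zero_iff {m : Nat} : pc m = 0 ↔ m = 0 := by
  constructor
  · intro h
    apply Nat.eq_of_testBit_eq
    intro i
    rw [Nat.zero_testBit]
    by_contra hb
    rw [Bool.not_eq_false] at hb
    have hlt : i < m + 1 := by
      have := Nat.ge_two_pow_of_testBit hb
      have := @Nat.lt_two_pow_self i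
      omega
    have : i ∈ (Finset.range (m + 1)).filter (fun i => m.testBit i) := by
      simp [hlt, hb]
    rw [Finset.card_eq_zero.mp h] at this
    simp at this
  · rintro rfl; exact pc_zero

/-- componentwise pair fold splits into two independent folds -/
theorem pv_pairFold {ι : Type} (F G : List Int → ι → List Int) :
    ∀ (l : List ι) (X Y : List Int),
    l.foldl (fun (AB : List Int × List Int) p => (F AB.1 p, G AB.2 p)) (X, Y) =
      (l.foldl F X, l.foldl G Y) := by
  intro l
  induction l with
  | nil => intro X Y; rfl
  | cons a t ih => intro X Y; simp only [List.foldl_cons]; exact ih (F X a) (G Y a)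

/-- the placement loop of A, per input vector -/
def plc (V : List Int) (n : Nat) : List Int :=
  (PySem.List.enumerate (pvPopcnts n) 0).foldl
    (fun (X : List Int) pi => X.set ((pi.2.toNat <<< n) ||| pi.1.toNat) (geti V pi.1.toNat))
    (List.replicate ((n + 1) * 2 ^ n) 0)

theorem plc_spec (V : List Int) (n : Nat) :
    (plc V n).length = (n + 1) * 2 ^ n ∧
    ∀ p k, p ≤ n → k < 2 ^ n →
      geti (plc V n) (p * 2 ^ n + k) = if pc k = p then geti V k else 0 :=
  pv_place_spec V n ((n + 1) * 2 ^ n) rfl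

/-- one component of the zeta pair loop -/
def zta (X : List Int) (n : Nat) : List Int :=
  (pvButterflyMasks n ((n + 1) * 2 ^ n)).foldl
    (fun (D : List Int) p => D.set p.2 (geti D p.2 + geti D p.1)) X

theorem zta_spec (X : List Int) (n : Nat) (hX : X.length = (n + 1) * 2 ^ n) :
    (zta X n).length = (n + 1) * 2 ^ n ∧
    ∀ s < (n + 1) * 2 ^ n, geti (zta X n) s = mtrans 1 n (fun t => geti X t) s := by
  have hstep : (fun (D : List Int) (p : Nat × Nat) => D.set p.2 (geti D p.2 + geti D p.1)) =
      (fun (D : List Int) (p : Nat × Nat) => D.set p.2 (geti D p.2 + 1 * geti D p.1)) := by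
    funext D p; rw [one_mul]
  unfold zta
  rw [hstep, ← hX]
  exact pv_butterfly_bridge 1 n X

theorem zeta_pair_eq (X Y : List Int) (n : Nat) (hX : X.length = (n + 1) * 2 ^ n) :
    pvZetaPair (X, Y) n = (zta X n, zta Y n) := by
  show (pvButterflyMasks n ((X, Y) : List Int × List Int).1.length).foldl
      (fun (AB : List Int × List Int) p =>
        (AB.1.set p.2 (geti AB.1 p.2 + geti AB.1 p.1),
         AB.2.set p.2 (geti AB.2 p.2 + geti AB.2 p.1))) (X, Y) = (zta X n, zta Y n)
  rw [show (((X, Y) : List Int × List Int).1.length) = (n + 1) * 2 ^ n from hX]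
  unfold zta
  exact pv_pairFold (fun (D : List Int) (p : Nat × Nat) => D.set p.2 (geti D p.2 + geti D p.1))
    (fun (D : List Int) (p : Nat × Nat) => D.set p.2 (geti D p.2 + geti D p.1))
    (pvButterflyMasks n ((n + 1) * 2 ^ n)) X Y

/-- the triple accumulation loop of A -/
def mul3 (Ar Br : List Int) (n : Nat) : List Int :=
  (pvStepRange ((n + 1) * 2 ^ n) (2 ^ n)).foldl
    (fun Cr i => (pvStepRange ((n + 1) * 2 ^ n - i) (2 ^ n)).foldl
      (fun Cr j => (List.range (2 ^ n)).foldl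
        (fun (Cr : List Int) k => Cr.set ((i + j) ||| k)
          (geti Cr ((i + j) ||| k) + geti Ar (i ||| k) * geti Br (j ||| k))) Cr) Cr)
    (List.replicate ((n + 1) * 2 ^ n) 0)

theorem mul3_spec (Ar Br : List Int) (n : Nat) :
    (mul3 Ar Br n).length = (n + 1) * 2 ^ n ∧
    ∀ r k, r ≤ n → k < 2 ^ n →
      geti (mul3 Ar Br n) (r * 2 ^ n + k) =
      ∑ p ∈ Finset.range (r + 1), geti Ar (p * 2 ^ n + k) * geti Br ((r - p) * 2 ^ n + k) :=
  pv_multiply_spec Ar Br n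

theorem mob_spec (C : List Int) (n : Nat) :
    (pvMobius C n).length = C.length ∧
    ∀ s < C.length, geti (pvMobius C n) s = mtrans (-1) n (fun t => geti C t) s := by
  have hstep : (fun (D : List Int) (p : Nat × Nat) => D.set p.2 (geti D p.2 - geti D p.1)) =
      (fun (D : List Int) (p : Nat × Nat) => D.set p.2 (geti D p.2 + (-1) * geti D p.1)) := by
    funext D p; congr 1; ring
  unfold pvMobius
  rw [hstep]
  exact pv_butterfly_bridge (-1) n C

/-- the writeback loop of A -/
def wrb (A Cr : List Int) (n : Nat) : List Int :=
  (PySem.List.enumerate (pvPopcnts n) 0).foldl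
    (fun (X : List Int) pi => X.set pi.1.toNat (geti Cr ((pi.2.toNat <<< n) ||| pi.1.toNat))) A

theorem wrb_spec (A Cr : List Int) (n : Nat) (hlen : 2 ^ n ≤ A.length) :
    (wrb A Cr n).length = A.length ∧
    (∀ s, s < 2 ^ n → geti (wrb A Cr n) s = geti Cr (pc s * 2 ^ n + s)) ∧
    (∀ s, 2 ^ n ≤ s → geti (wrb A Cr n) s = geti A s) :=
  pv_writeback_spec A Cr n hlen

-- ===== glue layer: B's stages =====

theorem pv_overwrite_char (w : Nat → Int) (m : Nat) (A0 : List Int) (hm : m ≤ A0.length) :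
    ((List.range m).foldl (fun (R : List Int) s => R.set s (w s)) A0).length = A0.length ∧
    (∀ s, s < m → geti ((List.range m).foldl (fun (R : List Int) s => R.set s (w s)) A0) s = w s) ∧
    (∀ s, m ≤ s → geti ((List.range m).foldl (fun (R : List Int) s => R.set s (w s)) A0) s = geti A0 s) := by
  obtain ⟨h1, h2, h3⟩ := pv_setFold (fun u : Nat => u) w (List.range m) A0
    (fun u hu => lt_of_lt_of_le (List.mem_range.mp hu) hm) (fun u _ v _ h => h)
  exact ⟨h1, fun s hs => h3 s (List.mem_range.mpr hs),
    fun s hs => h2 s (fun u hu => by rw [List.mem_range] at hu; omega)⟩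

/-- B's table of subset-convolution values -/
def altC (A B : List Int) (n : Nat) : List Int :=
  (List.range (2 ^ n)).foldl
    (fun (C : List Int) s => C.set s
      ((List.range (s + 1)).foldl
        (fun acc t => if t &&& s == t then acc + geti A t * geti B (s ^^^ t) else acc) 0))
    (List.replicate (2 ^ n) 0)

/-- B's result: first `2^n` entries of `A` overwritten from `altC` -/
def altOut (A B : List Int) (n : Nat) : List Int :=
  (List.range (2 ^ n)).foldl (fun (R : List Int) s => R.set s (geti (altC A B n) s)) A

theorem altC_spec (A B : List Int) (n : Nat) :
    ∀ s, s < 2 ^ n → geti (altC A B n) s =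
      (List.range (s + 1)).foldl
        (fun acc t => if t &&& s == t then acc + geti A t * geti B (s ^^^ t) else acc) 0 :=
  fun s hs => (pv_overwrite_char
    (fun s => (List.range (s + 1)).foldl
      (fun acc t => if t &&& s == t then acc + geti A t * geti B (s ^^^ t) else acc) 0)
    (2 ^ n) (List.replicate (2 ^ n) 0) (by rw [List.length_replicate])).2.1 s hs

theorem altOut_spec (A B : List Int) (n : Nat) (hlen : 2 ^ n ≤ A.length) :
    (altOut A B n).length = A.length ∧
    (∀ s, s < 2 ^ n → geti (altOut A B n) s = geti (altC A B n) s) ∧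
    (∀ s, 2 ^ n ≤ s → geti (altOut A B n) s = geti A s) :=
  pv_overwrite_char (fun s => geti (altC A B n) s) (2 ^ n) A hlen

theorem pv_filter_map_if (p : Nat → Bool) (g : Nat → Int) :
    ∀ l : List Nat, ((l.filter p).map g).sum = (l.map (fun t => if p t then g t else 0)).sum := by
  intro l
  induction l with
  | nil => rfl
  | cons a t ih =>
    rw [List.filter_cons]
    by_cases h : p a
    · rw [if_pos h, List.map_cons, List.map_cons, List.sum_cons, List.sum_cons, ih, if_pos h]
    · rw [if_neg h, List.map_cons, List.sum_cons, ih, if_neg h, zero_add]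

theorem pv_alt_inner (A B : List Int) (s : Nat) :
    (List.range (s + 1)).foldl
      (fun acc t => if t &&& s == t then acc + geti A t * geti B (s ^^^ t) else acc) 0 =
    ∑ t ∈ (Finset.range (s + 1)).filter (fun t => t ||| s = s), geti A t * geti B (s ^^^ t) := by
  refine (pv_condFoldSum (fun t => t &&& s == t)
    (fun t => geti A t * geti B (s ^^^ t)) (List.range (s + 1)) 0).trans ?_
  rw [zero_add, pv_filter_map_if, pv_sum_range, Finset.sum_filter]
  apply Finset.sum_congr rfl
  intro t _
  by_cases h : t ||| s = s
  · rw [if_pos h, if_pos (beq_iff_eq.mpr (pv_and_eq_iff_or_eq.mpr h))]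
  · rw [if_neg h, if_neg]
    simp only [beq_iff_eq]
    exact fun hc => h (pv_and_eq_iff_or_eq.mp hc)

theorem X0_eq_submask (f g : Nat → Int) {n s : Nat} (hs : s < 2 ^ n) :
    X0 f g n (pc s) s =
    ∑ t ∈ (Finset.range (s + 1)).filter (fun t => t ||| s = s), f t * g (s ^^^ t) := by
  rw [X0]
  refine Finset.sum_nbij' (i := fun uv : Nat × Nat => uv.1) (j := fun t => (t, s ^^^ t))
    ?_ ?_ ?_ ?_ ?_
  · intro uv huv
    have h1 := Finset.mem_filter.mp huv
    have h2 := Finset.mem_product.mp h1.1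
    have hu := mem_Dset.mp h2.1
    rw [Finset.mem_filter, Finset.mem_range]
    refine ⟨?_, hu.2.1⟩
    show uv.1 < s + 1
    omega
  · intro t ht
    rw [Finset.mem_filter, Finset.mem_range] at ht
    obtain ⟨-, hor⟩ := ht
    obtain ⟨hor2, -⟩ := pv_sub_or_xor hor
    have hxor_sub : (s ^^^ t) ||| s = s := by
      rw [pv_or_eq_iff_forall]
      intro i hbi
      rw [Nat.testBit_xor] at hbi
      cases hsb : s.testBit i
      · rw [hsb] at hbi
        simp only [Bool.false_xor] at hbi
        have h5 := pv_or_eq_iff_forall.mp hor i hbi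
        rw [h5] at hsb
        simp at hsb
      · rfl
    refine Finset.mem_filter.mpr ⟨Finset.mem_product.mpr ⟨mem_Dset_of hor hs,
      mem_Dset_of hxor_sub hs⟩, hor2, pc_sub_add hor⟩
  · intro uv huv
    have h1 := Finset.mem_filter.mp huv
    have h2 := Finset.mem_product.mp h1.1
    obtain ⟨hor, hpc⟩ := h1.2
    have hand : uv.1 &&& uv.2 = 0 := by
      have h3 := pc_or_and uv.1 uv.2
      rw [hor, hpc] at h3
      exact pc_eq_zero_iff.mp (by omega)
    have := pv_disj_eq_xor hand hor
    exact Prod.ext rfl this.symm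
  · intro t _
    rfl
  · intro uv huv
    have h1 := Finset.mem_filter.mp huv
    obtain ⟨hor, hpc⟩ := h1.2
    have hand : uv.1 &&& uv.2 = 0 := by
      have h3 := pc_or_and uv.1 uv.2
      rw [hor, hpc] at h3
      exact pc_eq_zero_iff.mp (by omega)
    rw [← pv_disj_eq_xor hand hor]

theorem pv_list_eq_of_geti (l1 l2 : List Int) (hlen : l1.length = l2.length)
    (h : ∀ i, i < l1.length → geti l1 i = geti l2 i) : l1 = l2 := by
  apply List.ext_getElem hlen
  intro i h1 h2
  have hh := h i h1
  rwa [geti, geti, List.getD_eq_getElem?_getD, List.getD_eq_getElem?_getD,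
    List.getElem?_eq_getElem h1, List.getElem?_eq_getElem h2] at hh

-- ===== the central value computation =====

theorem pv_key (A B : List Int) (n : Nat) :
    ∀ t, t < (n + 1) * 2 ^ n →
      geti (mul3 (zta (plc A n) n) (zta (plc B n) n) n) t =
      mtrans 1 n
        (fun u => X0 (fun x => geti A x) (fun x => geti B x) n (u / 2 ^ n) (u % 2 ^ n)) t := by
  intro t ht
  have hM : 0 < 2 ^ n := Nat.two_pow_pos n
  obtain ⟨p, k, hp, hk, rfl⟩ : ∃ p k, p ≤ n ∧ k < 2 ^ n ∧ t = p * 2 ^ n + k := by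
    refine ⟨t / 2 ^ n, t % 2 ^ n, ?_, Nat.mod_lt _ hM, ?_⟩
    · have := (Nat.div_lt_iff_lt_mul hM).mpr ht
      omega
    · have h2 := Nat.div_add_mod t (2 ^ n)
      rw [Nat.mul_comm] at h2
      omega
  have hAr : ∀ q, q ≤ n → geti (zta (plc A n) n) (q * 2 ^ n + k) =
      ∑ u ∈ Dset n k, (if pc u = q then geti A u else 0) := by
    intro q hq
    have hidx : q * 2 ^ n + k < (n + 1) * 2 ^ n := by
      have h1 : q * 2 ^ n ≤ n * 2 ^ n := Nat.mul_le_mul_right _ hq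
      have h2 : (n + 1) * 2 ^ n = n * 2 ^ n + 2 ^ n := by ring
      omega
    rw [(zta_spec (plc A n) n (plc_spec A n).1).2 _ hidx, mtrans_one_closed, Dset_block hk,
      Finset.sum_image (by intro x _ y _ hxy; dsimp only at hxy; omega)]
    apply Finset.sum_congr rfl
    intro u hu
    have hu' := mem_Dset.mp hu
    exact (plc_spec A n).2 q u hq (lt_of_le_of_lt hu'.1 hk)
  have hBr : ∀ q, q ≤ n → geti (zta (plc B n) n) (q * 2 ^ n + k) =
      ∑ u ∈ Dset n k, (if pc u = q then geti B u else 0) := by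
    intro q hq
    have hidx : q * 2 ^ n + k < (n + 1) * 2 ^ n := by
      have h1 : q * 2 ^ n ≤ n * 2 ^ n := Nat.mul_le_mul_right _ hq
      have h2 : (n + 1) * 2 ^ n = n * 2 ^ n + 2 ^ n := by ring
      omega
    rw [(zta_spec (plc B n) n (plc_spec B n).1).2 _ hidx, mtrans_one_closed, Dset_block hk,
      Finset.sum_image (by intro x _ y _ hxy; dsimp only at hxy; omega)]
    apply Finset.sum_congr rfl
    intro u hu
    have hu' := mem_Dset.mp hu
    exact (plc_spec B n).2 q u hq (lt_of_le_of_lt hu'.1 hk)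
  refine ((mul3_spec _ _ n).2 p k hp hk).trans ?_
  calc
    ∑ q ∈ Finset.range (p + 1),
        geti (zta (plc A n) n) (q * 2 ^ n + k) * geti (zta (plc B n) n) ((p - q) * 2 ^ n + k)
      = ∑ q ∈ Finset.range (p + 1),
        (∑ u ∈ Dset n k, (if pc u = q then geti A u else 0)) *
        (∑ v ∈ Dset n k, (if pc v = p - q then geti B v else 0)) := by
        apply Finset.sum_congr rfl
        intro q hq
        rw [Finset.mem_range] at hq
        rw [hAr q (by omega), hBr (p - q) (by omega)]
    _ = ∑ uv ∈ Finset.filter (fun uv : Nat × Nat => pc uv.1 + pc uv.2 = p)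
          ((Dset n k) ×ˢ (Dset n k)), geti A uv.1 * geti B uv.2 :=
        pv_product_form (fun x => geti A x) (fun x => geti B x) p
    _ = ∑ t' ∈ Dset n k, X0 (fun x => geti A x) (fun x => geti B x) n p t' :=
        (pv_candidate_zeta (fun x => geti A x) (fun x => geti B x) hk p).symm
    _ = mtrans 1 n
        (fun u => X0 (fun x => geti A x) (fun x => geti B x) n (u / 2 ^ n) (u % 2 ^ n))
        (p * 2 ^ n + k) := by
        rw [mtrans_one_closed, Dset_block hk,
          Finset.sum_image (by intro x _ y _ hxy; dsimp only at hxy; omega)]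
        apply Finset.sum_congr rfl
        intro u hu
        have hu' := mem_Dset.mp hu
        have hulow : u < 2 ^ n := lt_of_le_of_lt hu'.1 hk
        rw [pv_block_div hulow, pv_block_mod hulow]

theorem pv_A_value (A B : List Int) (n : Nat) : ∀ s, s < 2 ^ n →
    geti (pvMobius (mul3 (zta (plc A n) n) (zta (plc B n) n) n) n) (pc s * 2 ^ n + s) =
    X0 (fun x => geti A x) (fun x => geti B x) n (pc s) s := by
  intro s hs
  have hpc := pc_le hs
  have hidx : pc s * 2 ^ n + s < (n + 1) * 2 ^ n := by
    have h1 : pc s * 2 ^ n ≤ n * 2 ^ n := Nat.mul_le_mul_right _ hpc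
    have h2 : (n + 1) * 2 ^ n = n * 2 ^ n + 2 ^ n := by ring
    omega
  have hlen0 : (mul3 (zta (plc A n) n) (zta (plc B n) n) n).length = (n + 1) * 2 ^ n :=
    (mul3_spec _ _ n).1
  refine ((mob_spec (mul3 (zta (plc A n) n) (zta (plc B n) n) n) n).2 (pc s * 2 ^ n + s)
    (by rw [hlen0]; exact hidx)).trans ?_
  refine (mtrans_congr (-1) n (pc s * 2 ^ n + s) _
    (mtrans 1 n (fun u => X0 (fun x => geti A x) (fun x => geti B x) n (u / 2 ^ n) (u % 2 ^ n)))
    (fun t htle => pv_key A B n t (by omega)) _ (le_refl _)).trans ?_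
  rw [mtrans_inv']
  show X0 (fun x => geti A x) (fun x => geti B x) n
      ((pc s * 2 ^ n + s) / 2 ^ n) ((pc s * 2 ^ n + s) % 2 ^ n) = _
  rw [pv_block_div hs, pv_block_mod hs]

theorem pv_core (A B : List Int) (n : Nat) (hlen : 2 ^ n ≤ A.length) :
    wrb A (pvMobius (mul3 (zta (plc A n) n) (zta (plc B n) n) n) n) n = altOut A B n := by
  obtain ⟨hWlen, hWlow, hWhigh⟩ :=
    wrb_spec A (pvMobius (mul3 (zta (plc A n) n) (zta (plc B n) n) n) n) n hlen
  obtain ⟨hOlen, hOlow, hOhigh⟩ := altOut_spec A B n hlen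
  apply pv_list_eq_of_geti
  · exact hWlen.trans hOlen.symm
  · intro i hi
    by_cases hsm : i < 2 ^ n
    · refine (hWlow i hsm).trans ?_
      refine (pv_A_value A B n i hsm).trans ?_
      refine (X0_eq_submask (fun x => geti A x) (fun x => geti B x) hsm).trans ?_
      refine ((pv_alt_inner A B i).symm).trans ?_
      exact ((altC_spec A B n i hsm).symm).trans ((hOlow i hsm).symm)
    · have h2 : 2 ^ n ≤ i := Nat.le_of_not_lt hsm
      exact (hWhigh i h2).trans ((hOhigh i h2).symm)

-- ===== VERDICT (by name: the statement is the Claim_ definition above) =====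
theorem subset_conv_spec : Claim_equal_subset_conv := by
  intro A B N _ hpre
  obtain ⟨hN, hAB, hlen⟩ := hpre
  show subset_conv A B N = subset_conv_alt A B N
  have hpair : ((PySem.List.enumerate (pvPopcnts N.toNat) 0).foldl
      (fun (ab : List Int × List Int) pi =>
        (ab.1.set ((pi.2.toNat <<< N.toNat) ||| pi.1.toNat) (geti A pi.1.toNat),
         ab.2.set ((pi.2.toNat <<< N.toNat) ||| pi.1.toNat) (geti B pi.1.toNat)))
      (List.replicate ((N.toNat + 1) * 2 ^ N.toNat) 0,
       List.replicate ((N.toNat + 1) * 2 ^ N.toNat) 0)) =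
      (plc A N.toNat, plc B N.toNat) := by
    unfold plc
    exact pv_pairFold
      (fun (X : List Int) (pi : Int × Int) =>
        X.set ((pi.2.toNat <<< N.toNat) ||| pi.1.toNat) (geti A pi.1.toNat))
      (fun (X : List Int) (pi : Int × Int) =>
        X.set ((pi.2.toNat <<< N.toNat) ||| pi.1.toNat) (geti B pi.1.toNat))
      (PySem.List.enumerate (pvPopcnts N.toNat) 0)
      (List.replicate ((N.toNat + 1) * 2 ^ N.toNat) 0)
      (List.replicate ((N.toNat + 1) * 2 ^ N.toNat) 0)
  have hA : subset_conv A B N =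
      wrb A (pvMobius (mul3 (zta (plc A N.toNat) N.toNat) (zta (plc B N.toNat) N.toNat)
        N.toNat) N.toNat) N.toNat := by
    simp only [subset_conv, Nat.one_shiftLeft]
    rw [hpair, zeta_pair_eq _ _ _ (plc_spec A N.toNat).1]
    rfl
  have hB : subset_conv_alt A B N = altOut A B N.toNat := by
    simp only [subset_conv_alt, Nat.one_shiftLeft, altOut, altC]
  rw [hA, hB]
  exact pv_core A B N.toNat hlen
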